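-- pv_equiv track=rewrite | github.com/jonghocode/Algorithm | BFS/PCCP 기출 2번.py | solution
-- ===== SOURCE A (Python) =====
-- from collections import deque
--
-- def solution(land):
--
--     def bfs(cnt, i, j):
--         q = deque([])
--         q.append([i, j])
--         chk[i][j] = cnt
--         cnt2 = 0
--         while q:
--             x, y = q.popleft()
--             cnt2 += 1
--             for i in range(4):
--                 nx, ny = x + dirx[i], y + diry[i]
--                 if nx < 0 or nx >= n or ny < 0 or ny >= m:
--                     continue
--                 if chk[nx][ny] != 0:
--                     continue
--                 if land[nx][ny] == 0:
--                     continue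
--                 chk[nx][ny] = cnt
--                 q.append([nx, ny])
--         return cnt2
--
--     answer = -1
--
--     n = len(land)
--     m = len(land[0])
--
--     dirx, diry = [-1, 1, 0, 0], [0, 0, -1, 1]
--     chk = [[0 for _ in range(m)] for _ in range(n)]
--     cnt = 1
--     lst = []
--     for i in range(n):
--         for j in range(m):
--             if land[i][j] == 1 and chk[i][j] == 0:
--                 lst.append(bfs(cnt, i, j))
--                 cnt += 1
--     # lst[chk[i][j]-1]에 값 있음
--
--     for i in range(m):
--         sum = 0
--         dict = {}
--         for j in range(n):
--             if chk[j][i] not in dict and chk[j][i] != 0: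
--                 dict[chk[j][i]] = 1
--                 sum += lst[chk[j][i]-1]
--         answer = max(answer, sum)
--
--     return answer
-- ===== SOURCE B (Python) =====
-- def solution(land):
--     n = len(land)
--     m = len(land[0])
--     N = n * m
--
--     parent = list(range(N))
--     size = [1] * N
--     has1 = [land[k // m][k % m] == 1 for k in range(N)]
--
--     def find(k):
--         while parent[k] != k:
--             k = parent[k]
--         return k
--
--     def union(a, b):
--         ra, rb = find(a), find(b)
--         if ra != rb:
--             lo, hi = (ra, rb) if ra < rb else (rb, ra)
--             parent[hi] = lo
--             size[lo] += size[hi]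
--             has1[lo] = has1[lo] or has1[hi]
--
--     for k in range(N):
--         if land[k // m][k % m] != 0:
--             if k >= m and land[(k - m) // m][(k - m) % m] != 0:
--                 union(k, k - m)
--             if k % m != 0 and land[(k - 1) // m][(k - 1) % m] != 0:
--                 union(k, k - 1)
--
--     best = -1
--     for i in range(m):
--         seen = set()
--         s = 0
--         for j in range(n):
--             if land[j][i] != 0:
--                 r = find(j * m + i)
--                 if has1[r] and r not in seen:
--                     seen.add(r)
--                     s += size[r]
--         best = max(best, s)
--     return best
-- ===== Notes on version B (the rewrite author's own statement) =====
-- stated objective: alternative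
-- what changed: Replaces A's per-component BFS flood fill and label array by a union-find over flattened grid indices (each nonzero cell unioned with its upper/left nonzero neighbour, with per-root component size and contains-a-1 flags maintained at union time), then sums sizes of distinct roots per column instead of looking up labels in a BFS-size list.
import Mathlib
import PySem

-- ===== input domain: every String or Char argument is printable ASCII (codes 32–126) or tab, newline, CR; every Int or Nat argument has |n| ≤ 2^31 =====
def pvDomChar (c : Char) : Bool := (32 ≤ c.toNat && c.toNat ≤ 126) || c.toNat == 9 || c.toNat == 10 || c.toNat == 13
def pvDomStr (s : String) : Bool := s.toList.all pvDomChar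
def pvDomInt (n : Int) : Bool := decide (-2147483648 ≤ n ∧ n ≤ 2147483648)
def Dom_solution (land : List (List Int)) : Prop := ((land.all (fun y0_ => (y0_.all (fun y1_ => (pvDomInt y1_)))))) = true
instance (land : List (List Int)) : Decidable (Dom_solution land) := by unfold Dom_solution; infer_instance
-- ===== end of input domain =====

-- B replaces A's BFS flood-fill labelling by a union-find over the flattened grid
-- (each land cell unioned with its upper/left land neighbour, per-root size and
-- contains-a-1 flags), then sums distinct roots per column; objective: alternative.

-- land[x][y] (accessed only at in-range indices in both programs; exact there)
def pvLandAt (land : List (List Int)) (x y : Int) : Int :=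
  PySem.List.pyGetD (PySem.List.pyGetD land x []) y 0

-- dirx = [-1,1,0,0] and diry = [0,0,-1,1], zipped into offset pairs
def pvDirs : List (Int × Int) := [(-1, 0), (1, 0), (0, -1), (0, 1)]

-- all in-grid cells, row-major
def pvGridList (n m : Int) : List (Int × Int) :=
  (PySem.List.pyRange 0 n 1).flatMap (fun x => (PySem.List.pyRange 0 m 1).map (fun y => (x, y)))

-- number of unmarked in-grid cells: termination measure for A's flood-fill loop
def pvUnmarked (n m : Int) (chk : (Int × Int) → Int) : Nat :=
  (pvGridList n m).countP (fun p => decide (chk p = 0))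

lemma pv_mem_gridList (n m : Int) (p : Int × Int) :
    p ∈ pvGridList n m ↔ (0 ≤ p.1 ∧ p.1 < n ∧ 0 ≤ p.2 ∧ p.2 < m) := by
  obtain ⟨a, b⟩ := p
  simp [pvGridList, List.mem_flatMap, PySem.List.mem_pyRange_one]
  tauto

lemma pv_gridList_nodup (n m : Int) : (pvGridList n m).Nodup := by
  have h : pvGridList n m = (PySem.List.pyRange 0 n 1).product (PySem.List.pyRange 0 m 1) := by
    simp [pvGridList, List.product]
  rw [h]
  exact List.Nodup.product (PySem.List.nodup_pyRange_one 0 n) (PySem.List.nodup_pyRange_one 0 m)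

lemma pv_countP_update (l : List (Int × Int)) (chk : (Int × Int) → Int) (p : Int × Int) (v : Int)
    (hnd : l.Nodup) (hp : p ∈ l) (h0 : chk p = 0) (hv : v ≠ 0) :
    l.countP (fun q => decide (Function.update chk p v q = 0)) + 1 =
      l.countP (fun q => decide (chk q = 0)) := by
  induction l with
  | nil => cases hp
  | cons a l ih =>
    rcases List.nodup_cons.mp hnd with ⟨ha, hnd'⟩
    rw [List.countP_cons, List.countP_cons]
    rcases List.mem_cons.mp hp with rfl | hp'
    · have h1 : l.countP (fun q => decide (Function.update chk p v q = 0)) =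
          l.countP (fun q => decide (chk q = 0)) := by
        apply List.countP_congr
        intro q hq
        have hqp : q ≠ p := fun h => ha (h ▸ hq)
        simp [Function.update_of_ne hqp]
      simp [h1, Function.update_self, hv, h0]
    · have hap : a ≠ p := fun h => ha (h ▸ hp')
      have h2 : Function.update chk p v a = chk a := Function.update_of_ne hap _ _
      rw [h2]
      have := ih hnd' hp'
      omega

lemma pvUnmarked_update (n m : Int) (chk : (Int × Int) → Int) (p : Int × Int) (v : Int)
    (hp : 0 ≤ p.1 ∧ p.1 < n ∧ 0 ≤ p.2 ∧ p.2 < m) (h0 : chk p = 0) (hv : v ≠ 0) :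
    pvUnmarked n m (Function.update chk p v) + 1 = pvUnmarked n m chk := by
  unfold pvUnmarked
  exact pv_countP_update _ chk p v (pv_gridList_nodup n m) ((pv_mem_gridList n m p).mpr hp) h0 hv

lemma pvMeasure_foldl (n m : Int)
    (f : (((Int × Int) → Int) × List (Int × Int)) → (Int × Int) → (((Int × Int) → Int) × List (Int × Int)))
    (hstep : ∀ st d, f st d = st ∨
      (pvUnmarked n m (f st d).1 + 1 = pvUnmarked n m st.1 ∧ (f st d).2.length = st.2.length + 1))
    (ds : List (Int × Int)) (st : ((Int × Int) → Int) × List (Int × Int)) :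
    2 * pvUnmarked n m (ds.foldl f st).1 + (ds.foldl f st).2.length ≤
      2 * pvUnmarked n m st.1 + st.2.length := by
  induction ds generalizing st with
  | nil => simp
  | cons d ds ih =>
    simp only [List.foldl_cons]
    refine le_trans (ih (f st d)) ?_
    rcases hstep st d with h | ⟨h1, h2⟩
    · rw [h]
    · omega

-- ===== PORT A =====

-- one iteration of A's `for i in range(4)` body (continue-chain kept)
def pvStepA (land : List (List Int)) (n m cnt x y : Int)
    (st : ((Int × Int) → Int) × List (Int × Int)) (d : Int × Int) :
    ((Int × Int) → Int) × List (Int × Int) :=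
  if x + d.1 < 0 ∨ x + d.1 ≥ n ∨ y + d.2 < 0 ∨ y + d.2 ≥ m then st
  else if st.1 (x + d.1, y + d.2) ≠ 0 then st
  else if pvLandAt land (x + d.1) (y + d.2) = 0 then st
  else (Function.update st.1 (x + d.1, y + d.2) cnt, st.2 ++ [(x + d.1, y + d.2)])

def pvPushA (land : List (List Int)) (n m cnt x y : Int)
    (st : ((Int × Int) → Int) × List (Int × Int)) :
    ((Int × Int) → Int) × List (Int × Int) :=
  pvDirs.foldl (pvStepA land n m cnt x y) st

lemma pvStepA_cases (land : List (List Int)) (n m cnt x y : Int) (hc : cnt ≠ 0)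
    (st : ((Int × Int) → Int) × List (Int × Int)) (d : Int × Int) :
    pvStepA land n m cnt x y st d = st ∨
      (pvUnmarked n m (pvStepA land n m cnt x y st d).1 + 1 = pvUnmarked n m st.1 ∧
       (pvStepA land n m cnt x y st d).2.length = st.2.length + 1) := by
  unfold pvStepA
  split_ifs with h1 h2 h3
  · exact Or.inl rfl
  · exact Or.inl rfl
  · exact Or.inl rfl
  · refine Or.inr ⟨?_, by simp⟩
    push_neg at h1 h2
    exact pvUnmarked_update n m st.1 _ cnt ⟨by omega, by omega, by omega, by omega⟩ h2 hc

-- A's bfs while-loop: pop the queue front, push eligible neighbours at the back;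
-- chk (a mutable 2-D int array) is modelled as a function holding the same values.
-- cnt ≠ 0 is the totality guard (cnt is A's label counter, always ≥ 1).
lemma pvBfsA_dec (land : List (List Int)) (n m cnt x y : Int) (hc : cnt ≠ 0)
    (chk : (Int × Int) → Int) (rest : List (Int × Int)) :
    2 * pvUnmarked n m (pvPushA land n m cnt x y (chk, rest)).1 +
      (pvPushA land n m cnt x y (chk, rest)).2.length <
    2 * pvUnmarked n m chk + ((x, y) :: rest).length := by
  have h := pvMeasure_foldl n m (pvStepA land n m cnt x y)
    (fun st d => pvStepA_cases land n m cnt x y hc st d) pvDirs (chk, rest)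
  dsimp only at h
  simp only [pvPushA, List.length_cons]
  omega

def pvBfsA (land : List (List Int)) (n m cnt : Int) (hc : cnt ≠ 0) :
    ((Int × Int) → Int) → List (Int × Int) → Int → (((Int × Int) → Int) × Int)
  | chk, [], c2 => (chk, c2)
  | chk, (x, y) :: rest, c2 =>
    let st := pvPushA land n m cnt x y (chk, rest)
    pvBfsA land n m cnt hc st.1 st.2 (c2 + 1)
termination_by chk q _ => 2 * pvUnmarked n m chk + q.length
decreasing_by
  exact pvBfsA_dec land n m cnt x y hc chk rest

-- A's double scan: seed a bfs at each unmarked 1-cell; A's cnt always equals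
-- len(lst)+1, which is how the port carries it (same value at every step).
def pvScanA (land : List (List Int)) (n m : Int) : (((Int × Int) → Int) × List Int) :=
  (PySem.List.pyRange 0 n 1).foldl (fun st i =>
    (PySem.List.pyRange 0 m 1).foldl (fun st j =>
      if pvLandAt land i j = 1 ∧ st.1 (i, j) = 0 then
        let cnt : Int := (st.2.length : Int) + 1
        let r := pvBfsA land n m cnt (by omega) (Function.update st.1 (i, j) cnt) [(i, j)] 0
        (r.1, st.2 ++ [r.2])
      else st) st) ((fun _ => 0), [])

-- A's per-column loop: dict of labels seen, sum lst[chk[j][i]-1] on first sight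
-- (lst index is provably in range; pyGetD's default is never used)
def pvColA (n : Int) (chk : (Int × Int) → Int) (lst : List Int) (i : Int) : Int :=
  ((PySem.List.pyRange 0 n 1).foldl (fun (st : Int × PySem.Dict Int Int) j =>
    if (st.2.contains (chk (j, i))) = false ∧ chk (j, i) ≠ 0 then
      (st.1 + PySem.List.pyGetD lst (chk (j, i) - 1) 0, st.2.insert (chk (j, i)) 1)
    else st) (0, PySem.Dict.empty)).1

def solution (land : List (List Int)) : Int :=
  let n : Int := land.length
  -- land[0]: IndexError on empty land, excluded by Pre_solution
  let m : Int := ((PySem.List.pyGetD land 0 []).length : Int)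
  let s := pvScanA land n m
  (PySem.List.pyRange 0 m 1).foldl (fun answer i => max answer (pvColA n s.1 s.2 i)) (-1)

-- ===== PORT B =====

-- land[k // m][k % m]; every access Source B makes is at a nonnegative in-range index
-- on Pre_ inputs, where List.getD is exact
def pvAtIdx (land : List (List Int)) (m k : Nat) : Int :=
  (land.getD (k / m) []).getD (k % m) 0

def pvFindFuel (p : Nat → Nat) : Nat → Nat → Nat
  | 0, k => k
  | f+1, k => if p k = k then k else pvFindFuel p f (p k)

-- Source B's find: `while parent[k] != k: k = parent[k]`. Fuel k+1 is exact because the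
-- algorithm keeps parent[x] ≤ x (unions point the larger root at the smaller one),
-- so the parent chain from k strictly decreases; the fuel only makes the loop total.
def pvFind (p : Nat → Nat) (k : Nat) : Nat := pvFindFuel p (k + 1) k

-- parent, size, has1 (Python int/bool lists mutated by index) modelled as functions
def pvUnion (s : (Nat → Nat) × (Nat → Int) × (Nat → Bool)) (a b : Nat) :
    (Nat → Nat) × (Nat → Int) × (Nat → Bool) :=
  let ra := pvFind s.1 a
  let rb := pvFind s.1 b
  if ra ≠ rb then
    let lo := if ra < rb then ra else rb
    let hi := if ra < rb then rb else ra
    (Function.update s.1 hi lo,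
     Function.update s.2.1 lo (s.2.1 lo + s.2.1 hi),
     Function.update s.2.2 lo (s.2.2 lo || s.2.2 hi))
  else s

-- body of Source B's `for k in range(N)` union loop (a range over nonnegative ints)
def pvMerge (land : List (List Int)) (m : Nat)
    (s : (Nat → Nat) × (Nat → Int) × (Nat → Bool)) (k : Nat) :
    (Nat → Nat) × (Nat → Int) × (Nat → Bool) :=
  if pvAtIdx land m k ≠ 0 then
    let s1 := if m ≤ k ∧ pvAtIdx land m (k - m) ≠ 0 then pvUnion s k (k - m) else s
    if k % m ≠ 0 ∧ pvAtIdx land m (k - 1) ≠ 0 then pvUnion s1 k (k - 1) else s1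
  else s

-- Source B's inner column loop; seen is a Python set of roots
def pvColB (land : List (List Int)) (n m : Nat)
    (s : (Nat → Nat) × (Nat → Int) × (Nat → Bool)) (i : Nat) : Int :=
  ((List.range n).foldl (fun (st : Int × PySem.Set Nat) j =>
    if (land.getD j []).getD i 0 ≠ 0 then
      if s.2.2 (pvFind s.1 (j * m + i)) = true ∧
          PySem.Set.contains st.2 (pvFind s.1 (j * m + i)) = false then
        (st.1 + s.2.1 (pvFind s.1 (j * m + i)),
         PySem.Set.add st.2 (pvFind s.1 (j * m + i)))
      else st
    else st) (0, PySem.Set.empty)).1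

def solution_alt (land : List (List Int)) : Int :=
  let n := land.length
  -- land[0]: IndexError on empty land, excluded by Pre_solution
  let m := (PySem.List.pyGetD land 0 []).length
  let s := (List.range (n * m)).foldl (pvMerge land m)
    ((fun x => x), (fun _ => 1), (fun k => pvAtIdx land m k == 1))
  (List.range m).foldl (fun best i => max best (pvColB land n m s i)) (-1)

-- ===== PRECONDITION & SPEC =====
-- Pre_ excludes exactly the inputs where A raises IndexError: the empty grid
-- (land[0]) and ragged grids with a row shorter than row 0 (the land[i][j] scan).
def Pre_solution (land : List (List Int)) : Prop :=
  land ≠ [] ∧ ∀ r ∈ land, (land.headD []).length ≤ r.length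
instance (land : List (List Int)) : Decidable (Pre_solution land) := by
  unfold Pre_solution; infer_instance

def pvWitness_solution : List (List Int) := [[1, 0], [1, 1]]

def Spec_solution (land : List (List Int)) (out : Int) : Prop := out = solution_alt land
instance (land : List (List Int)) (out : Int) : Decidable (Spec_solution land out) := by
  unfold Spec_solution; infer_instance

-- ===== CLAIM (what is proved, stated in full; the proofs are below) =====
def Claim_equal_solution : Prop :=
  ∀ (land : List (List Int)), Dom_solution land → Pre_solution land →
    Spec_solution land (solution land)

-- ===== LEMMAS AND PROOFS =====
-- ===== graph notions (shared semantic layer) =====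
def pvGood (land : List (List Int)) (n m : Int) (u : Int × Int) : Prop :=
  0 ≤ u.1 ∧ u.1 < n ∧ 0 ≤ u.2 ∧ u.2 < m ∧ pvLandAt land u.1 u.2 ≠ 0

def pvGoodB (land : List (List Int)) (n m : Int) (u : Int × Int) : Bool :=
  decide (0 ≤ u.1) && decide (u.1 < n) && decide (0 ≤ u.2) && decide (u.2 < m) &&
    decide (pvLandAt land u.1 u.2 ≠ 0)

lemma pvGoodB_iff (land : List (List Int)) (n m : Int) (u : Int × Int) :
    pvGoodB land n m u = true ↔ pvGood land n m u := by
  simp [pvGoodB, pvGood]; tauto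

def pvAdj (land : List (List Int)) (n m : Int) (u v : Int × Int) : Prop :=
  pvGood land n m u ∧ pvGood land n m v ∧ (v.1 - u.1, v.2 - u.2) ∈ pvDirs

def pvReach (land : List (List Int)) (n m : Int) (s u : Int × Int) : Prop :=
  Relation.ReflTransGen (pvAdj land n m) s u

def pvClosed (land : List (List Int)) (n m : Int) (chk : (Int × Int) → Int) : Prop :=
  ∀ u v, chk u ≠ 0 → pvAdj land n m u v → chk v ≠ 0

lemma pvAdj_symm (land : List (List Int)) (n m : Int) (u v : Int × Int)
    (h : pvAdj land n m u v) : pvAdj land n m v u := by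
  obtain ⟨a, b⟩ := u; obtain ⟨c, d⟩ := v
  obtain ⟨hu, hv, hd⟩ := h
  refine ⟨hv, hu, ?_⟩
  simp [pvDirs] at hd ⊢
  omega

lemma pvReach_good (land : List (List Int)) (n m : Int) (s u : Int × Int)
    (hs : pvGood land n m s) (h : pvReach land n m s u) : pvGood land n m u := by
  induction h with
  | refl => exact hs
  | tail _ hadj ih => exact hadj.2.1

lemma pvReach_adj (land : List (List Int)) (n m : Int) (s u v : Int × Int)
    (h : pvReach land n m s u) (ha : pvAdj land n m u v) : pvReach land n m s v :=
  Relation.ReflTransGen.tail h ha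

lemma pvReach_symm (land : List (List Int)) (n m : Int) (s u : Int × Int)
    (h : pvReach land n m s u) : pvReach land n m u s := by
  induction h with
  | refl => exact Relation.ReflTransGen.refl
  | tail _ hadj ih => exact Relation.ReflTransGen.head (pvAdj_symm land n m _ _ hadj) ih

-- ===== canonical form of one neighbour step of A's bfs =====
lemma pvStepA_eq (land : List (List Int)) (n m cnt x y : Int)
    (st : ((Int × Int) → Int) × List (Int × Int)) (d : Int × Int) :
    pvStepA land n m cnt x y st d =
      if pvGoodB land n m (x + d.1, y + d.2) = true ∧ st.1 (x + d.1, y + d.2) = 0 then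
        (Function.update st.1 (x + d.1, y + d.2) cnt, st.2 ++ [(x + d.1, y + d.2)])
      else st := by
  unfold pvStepA
  split_ifs with h1 h2 h3 h4 <;> first | rfl | (exfalso; simp [pvGoodB] at *; omega)

-- ===== factoring the 4-neighbour fold =====
lemma pvPushA_split (land : List (List Int)) (n m cnt x y : Int) (ds : List (Int × Int)) :
    ∀ (chk : (Int × Int) → Int) (q : List (Int × Int)),
      ds.foldl (pvStepA land n m cnt x y) (chk, q) =
        ((ds.foldl (pvStepA land n m cnt x y) (chk, [])).1,
          q ++ (ds.foldl (pvStepA land n m cnt x y) (chk, [])).2) := by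
  induction ds with
  | nil => simp
  | cons d ds ih =>
    intro chk q
    simp only [List.foldl_cons, pvStepA_eq]
    by_cases hC : pvGoodB land n m (x + d.1, y + d.2) = true ∧ chk (x + d.1, y + d.2) = 0
    · simp only [if_pos hC]
      rw [ih _ (q ++ [(x + d.1, y + d.2)]), ih _ ([] ++ [(x + d.1, y + d.2)])]
      simp
    · simp only [if_neg hC]
      exact ih chk q

-- ===== the expansion characterised =====
def pvShift (x y : Int) (d : Int × Int) : Int × Int := (x + d.1, y + d.2)

lemma pvCore_spec (land : List (List Int)) (n m cnt x y : Int) (ds : List (Int × Int)) :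
    ∀ (chk : (Int × Int) → Int), (ds.map (pvShift x y)).Nodup →
      (∀ u, (ds.foldl (pvStepA land n m cnt x y) (chk, [])).1 u =
          if u ∈ (ds.foldl (pvStepA land n m cnt x y) (chk, [])).2 then cnt else chk u) ∧
      (ds.foldl (pvStepA land n m cnt x y) (chk, [])).2 =
        (ds.map (pvShift x y)).filter
          (fun v => pvGoodB land n m v && decide (chk v = 0)) := by
  induction ds with
  | nil => simp
  | cons d ds ih =>
    intro chk hnd
    simp only [List.map_cons, List.nodup_cons] at hnd
    obtain ⟨hd, hnd'⟩ := hnd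
    rw [show pvShift x y d = (x + d.1, y + d.2) from rfl] at hd
    simp only [List.foldl_cons, List.map_cons, pvStepA_eq, List.filter_cons, pvShift]
    by_cases hC : pvGoodB land n m (x + d.1, y + d.2) = true ∧ chk (x + d.1, y + d.2) = 0
    · simp only [if_pos hC, List.nil_append]
      rw [pvPushA_split land n m cnt x y ds _ [(x + d.1, y + d.2)]]
      obtain ⟨ihf, ihl⟩ := ih (Function.update chk (x + d.1, y + d.2) cnt) hnd'
      have hfl : (ds.foldl (pvStepA land n m cnt x y)
            (Function.update chk (x + d.1, y + d.2) cnt, [])).2 =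
          (ds.map (pvShift x y)).filter
            (fun v => pvGoodB land n m v && decide (chk v = 0)) := by
        rw [ihl]
        apply List.filter_congr
        intro v hv
        have hvne : v ≠ (x + d.1, y + d.2) := by
          intro h; exact hd (h ▸ hv)
        rw [Function.update_of_ne hvne]
      constructor
      · intro u
        rw [ihf u]
        by_cases hu : u ∈ (ds.foldl (pvStepA land n m cnt x y)
            (Function.update chk (x + d.1, y + d.2) cnt, [])).2
        · rw [if_pos hu, if_pos (by simp only [List.singleton_append, List.mem_cons]; exact Or.inr hu)]
        · rw [if_neg hu]
          by_cases hue : u = (x + d.1, y + d.2)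
          · subst hue
            rw [Function.update_self, if_pos (by simp)]
          · have hnotin : u ∉ [(x + d.1, y + d.2)] ++
                (ds.foldl (pvStepA land n m cnt x y)
                  (Function.update chk (x + d.1, y + d.2) cnt, [])).2 := by
              simp only [List.singleton_append, List.mem_cons]
              rintro (h | h)
              · exact hue h
              · exact hu h
            rw [Function.update_of_ne hue, if_neg hnotin]
      · have hpred : (pvGoodB land n m ((x + d.1, y + d.2) : Int × Int) &&
            decide (chk (x + d.1, y + d.2) = 0)) = true := by
          simp only [Bool.and_eq_true, decide_eq_true_eq]
          exact ⟨hC.1, hC.2⟩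
        rw [if_pos hpred, hfl]
        simp
    · simp only [if_neg hC]
      have hpred : ¬ (pvGoodB land n m ((x + d.1, y + d.2) : Int × Int) &&
          decide (chk (x + d.1, y + d.2) = 0)) = true := by
        simp only [Bool.and_eq_true, decide_eq_true_eq]
        intro h; exact hC h
      rw [if_neg hpred]
      exact ih chk hnd'

lemma pvDirs_shift_nodup (x y : Int) : (pvDirs.map (pvShift x y)).Nodup := by
  simp [pvDirs, pvShift, List.nodup_cons]

def pvInv (land : List (List Int)) (n m cnt : Int) (chk0 : (Int × Int) → Int)
    (seed : Int × Int) (S : Finset (Int × Int)) (chk : (Int × Int) → Int)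
    (q : List (Int × Int)) (c : Int) : Prop :=
  (∀ u, chk u = if u ∈ S then cnt else chk0 u) ∧
  (∀ u ∈ S, pvReach land n m seed u) ∧
  seed ∈ S ∧
  q.Nodup ∧
  (∀ u ∈ q, u ∈ S) ∧
  (∀ u ∈ S, u ∉ q → ∀ v, pvAdj land n m u v → v ∈ S) ∧
  c = (S.card : Int) - q.length ∧
  (∀ u ∈ S, chk0 u = 0)

lemma pvInv_step (land : List (List Int)) (n m cnt : Int) (chk0 : (Int × Int) → Int)
    (seed : Int × Int) (hcnt : cnt ≠ 0) (hcl : pvClosed land n m chk0)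
    (hgs : pvGood land n m seed)
    (S : Finset (Int × Int)) (chk : (Int × Int) → Int) (x y : Int)
    (rest : List (Int × Int)) (c : Int)
    (hinv : pvInv land n m cnt chk0 seed S chk ((x, y) :: rest) c) :
    pvInv land n m cnt chk0 seed
      (S ∪ (pvDirs.foldl (pvStepA land n m cnt x y) (chk, [])).2.toFinset)
      (pvDirs.foldl (pvStepA land n m cnt x y) (chk, [])).1
      (rest ++ (pvDirs.foldl (pvStepA land n m cnt x y) (chk, [])).2) (c + 1) := by
  obtain ⟨h1, h2, h3, h4, h5, h6, h7, h8⟩ := hinv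
  obtain ⟨hf, hl⟩ := pvCore_spec land n m cnt x y pvDirs chk (pvDirs_shift_nodup x y)
  set e := pvDirs.foldl (pvStepA land n m cnt x y) (chk, []) with he
  have hP : (x, y) ∈ S := h5 _ (List.mem_cons_self)
  have hPG : pvGood land n m (x, y) := pvReach_good land n m seed (x, y) hgs (h2 _ hP)
  have hchk0 : ∀ v, chk v = 0 → v ∉ S ∧ chk0 v = 0 := by
    intro v hv
    have := h1 v
    by_cases hvS : v ∈ S
    · rw [if_pos hvS] at this; exact absurd (hv ▸ this).symm hcnt
    · rw [if_neg hvS] at this; exact ⟨hvS, by rw [← this, hv]⟩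
  have hnew : ∀ v ∈ e.2, pvGood land n m v ∧ chk v = 0 ∧ pvAdj land n m (x, y) v := by
    intro v hv
    rw [hl] at hv
    obtain ⟨hmem, hpred⟩ := List.mem_filter.mp hv
    obtain ⟨d, hd, hdv⟩ := List.mem_map.mp hmem
    simp only [Bool.and_eq_true, decide_eq_true_eq] at hpred
    have hg : pvGood land n m v := (pvGoodB_iff land n m v).mp hpred.1
    refine ⟨hg, hpred.2, hPG, hg, ?_⟩
    rw [← hdv]
    simp only [pvShift]
    simpa using hd
  have hnewS : ∀ v ∈ e.2, v ∉ S := fun v hv => (hchk0 v (hnew v hv).2.1).1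
  have hnew0 : ∀ v ∈ e.2, chk0 v = 0 := fun v hv => (hchk0 v (hnew v hv).2.1).2
  have hnd : e.2.Nodup := by
    rw [hl]; exact (pvDirs_shift_nodup x y).filter _
  have hcard : (S ∪ e.2.toFinset).card = S.card + e.2.length := by
    rw [Finset.card_union_of_disjoint, List.toFinset_card_of_nodup hnd]
    rw [Finset.disjoint_right]
    intro v hv
    exact hnewS v (List.mem_toFinset.mp hv)
  have hrest : rest.Nodup ∧ (x, y) ∉ rest := by
    rw [List.nodup_cons] at h4; exact ⟨h4.2, h4.1⟩
  refine ⟨?_, ?_, Finset.mem_union_left _ h3, ?_, ?_, ?_, ?_, ?_⟩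
  · intro u
    rw [hf u, h1 u]
    by_cases hue : u ∈ e.2
    · rw [if_pos hue, if_pos (Finset.mem_union_right _ (List.mem_toFinset.mpr hue))]
    · rw [if_neg hue]
      by_cases huS : u ∈ S
      · rw [if_pos huS, if_pos (Finset.mem_union_left _ huS)]
      · rw [if_neg huS, if_neg (by
          intro h
          rcases Finset.mem_union.mp h with h | h
          · exact huS h
          · exact hue (List.mem_toFinset.mp h))]
  · intro u hu
    rcases Finset.mem_union.mp hu with h | h
    · exact h2 u h
    · exact pvReach_adj land n m seed (x, y) u (h2 _ hP) (hnew u (List.mem_toFinset.mp h)).2.2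
  · rw [List.nodup_append]
    refine ⟨hrest.1, hnd, ?_⟩
    intro a ha b hb
    rintro rfl
    exact hnewS a hb (h5 a (List.mem_cons_of_mem _ ha))
  · intro u hu
    rcases List.mem_append.mp hu with h | h
    · exact Finset.mem_union_left _ (h5 u (List.mem_cons_of_mem _ h))
    · exact Finset.mem_union_right _ (List.mem_toFinset.mpr h)
  · intro u hu hq v hadj
    rcases Finset.mem_union.mp hu with huS | hue
    · by_cases hup : u = (x, y)
      · subst hup
        obtain ⟨hgu, hgv, hoff⟩ := hadj
        by_cases hv0 : chk v = 0
        · refine Finset.mem_union_right _ (List.mem_toFinset.mpr ?_)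
          rw [hl]
          refine List.mem_filter.mpr ⟨?_, ?_⟩
          · refine List.mem_map.mpr ⟨(v.1 - x, v.2 - y), hoff, ?_⟩
            simp [pvShift]
          · simp only [Bool.and_eq_true, decide_eq_true_eq]
            exact ⟨(pvGoodB_iff land n m v).mpr hgv, hv0⟩
        · have := h1 v
          by_cases hvS : v ∈ S
          · exact Finset.mem_union_left _ hvS
          · rw [if_neg hvS] at this
            exfalso
            have hv0' : chk0 v ≠ 0 := fun h => hv0 (by rw [this, h])
            have : chk0 (x, y) ≠ 0 :=
              hcl v (x, y) hv0' (pvAdj_symm land n m _ _ ⟨hgu, hgv, hoff⟩)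
            exact this (h8 _ hP)
      · have hq' : u ∉ (x, y) :: rest := by
          intro h
          rcases List.mem_cons.mp h with h | h
          · exact hup h
          · exact hq (List.mem_append.mpr (Or.inl h))
        exact Finset.mem_union_left _ (h6 u huS hq' v hadj)
    · exact absurd (List.mem_append.mpr (Or.inr (List.mem_toFinset.mp hue))) hq
  · rw [hcard]
    simp only [List.length_append, List.length_cons] at h7 ⊢
    push_cast
    push_cast at h7
    omega
  · intro u hu
    rcases Finset.mem_union.mp hu with h | h
    · exact h8 u h
    · exact hnew0 u (List.mem_toFinset.mp h)

lemma pvBfsA_run (land : List (List Int)) (n m cnt : Int) (hc : cnt ≠ 0)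
    (chk0 : (Int × Int) → Int) (seed : Int × Int)
    (hcl : pvClosed land n m chk0) (hgs : pvGood land n m seed) :
    ∀ (chk : (Int × Int) → Int) (q : List (Int × Int)) (c : Int)
      (S : Finset (Int × Int)), pvInv land n m cnt chk0 seed S chk q c →
      ∃ S' : Finset (Int × Int), (∀ u, u ∈ S' ↔ pvReach land n m seed u) ∧
        pvBfsA land n m cnt hc chk q c =
          ((fun u => if u ∈ S' then cnt else chk0 u), (S'.card : Int)) := by
  intro chk q c
  induction chk, q, c using pvBfsA.induct land n m cnt hc with
  | case1 chk c =>
    intro S hinv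
    obtain ⟨h1, h2, h3, _h4, _h5, h6, h7, _h8⟩ := hinv
    refine ⟨S, ?_, ?_⟩
    · intro u
      constructor
      · intro hu; exact h2 u hu
      · intro hr
        induction hr with
        | refl => exact h3
        | tail hr hadj ihh => exact h6 _ ihh (by simp) _ hadj
    · rw [pvBfsA]
      simp only [List.length_nil, Nat.cast_zero, sub_zero] at h7
      rw [funext h1, h7]
  | case2 chk x y rest c st ih =>
    intro S hinv
    have hstep := pvInv_step land n m cnt chk0 seed hc hcl hgs S chk x y rest c hinv
    have hst : st = ((pvDirs.foldl (pvStepA land n m cnt x y) (chk, [])).1,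
        rest ++ (pvDirs.foldl (pvStepA land n m cnt x y) (chk, [])).2) := by
      show pvPushA land n m cnt x y (chk, rest) = _
      unfold pvPushA
      exact pvPushA_split land n m cnt x y pvDirs chk rest
    obtain ⟨S', hiff, heq⟩ :=
      ih (S ∪ (pvDirs.foldl (pvStepA land n m cnt x y) (chk, [])).2.toFinset)
        (by rw [show st.1 = _ from congrArg Prod.fst hst,
                show st.2 = _ from congrArg Prod.snd hst]; exact hstep)
    refine ⟨S', hiff, ?_⟩
    rw [pvBfsA]
    exact heq

-- one seed call of A's bfs, characterised
lemma pvFloodA (land : List (List Int)) (n m cnt : Int) (hc : cnt ≠ 0)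
    (chk0 : (Int × Int) → Int) (seed : Int × Int)
    (hcl : pvClosed land n m chk0) (hgs : pvGood land n m seed) (h0 : chk0 seed = 0) :
    ∃ S' : Finset (Int × Int), (∀ u, u ∈ S' ↔ pvReach land n m seed u) ∧
      pvBfsA land n m cnt hc (Function.update chk0 seed cnt) [seed] 0 =
        ((fun u => if u ∈ S' then cnt else chk0 u), (S'.card : Int)) := by
  have hinv : pvInv land n m cnt chk0 seed {seed} (Function.update chk0 seed cnt) [seed] 0 := by
    refine ⟨?_, ?_, Finset.mem_singleton_self seed, List.nodup_singleton seed, ?_, ?_, ?_, ?_⟩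
    · intro u
      by_cases hu : u = seed
      · subst hu; simp
      · simp [hu]
    · intro u hu; rw [Finset.mem_singleton] at hu; subst hu; exact Relation.ReflTransGen.refl
    · intro u hu; simp at hu; simp [hu]
    · intro u hu hq; exfalso; apply hq; rw [Finset.mem_singleton] at hu; simp [hu]
    · simp
    · intro u hu; rw [Finset.mem_singleton] at hu; subst hu; exact h0
  exact pvBfsA_run land n m cnt hc chk0 seed hcl hgs _ _ _ _ hinv

-- ===== A's per-column fold, characterised as a Finset sum =====
lemma pv_getD_cast (lst : List Int) (l : Int) (h0 : 1 ≤ l) :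
    PySem.List.pyGetD lst (l - 1) 0 = lst.getD (l - 1).toNat 0 := by
  have h : l - 1 = ((l - 1).toNat : Int) := by omega
  conv_lhs => rw [h]
  exact PySem.List.pyGetD_natCast lst (l - 1).toNat 0

lemma pvColA_fold (i : Int) (chk : (Int × Int) → Int) (lst : List Int)
    (hb : ∀ u, 0 ≤ chk u ∧ chk u ≤ (lst.length : Int)) :
    ∀ (js : List Int) (P : List Int) (st : Int × PySem.Dict Int Int),
      (∀ l, st.2.contains l = true ↔ (l ≠ 0 ∧ ∃ j ∈ P, chk (j, i) = l)) →
      st.1 = ∑ k ∈ (Finset.range lst.length).filter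
          (fun k : ℕ => ∃ j ∈ P, chk (j, i) = (k : ℤ) + 1), lst.getD k 0 →
      (js.foldl (fun (st : Int × PySem.Dict Int Int) j =>
        if (st.2.contains (chk (j, i))) = false ∧ chk (j, i) ≠ 0 then
          (st.1 + PySem.List.pyGetD lst (chk (j, i) - 1) 0, st.2.insert (chk (j, i)) 1)
        else st) st).1 =
      ∑ k ∈ (Finset.range lst.length).filter
          (fun k : ℕ => ∃ j ∈ P ++ js, chk (j, i) = (k : ℤ) + 1), lst.getD k 0 := by
  intro js
  induction js with
  | nil =>
    intro P st _ h2
    simpa using h2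
  | cons b js ih =>
    intro P st h1 h2
    simp only [List.foldl_cons]
    have hli : P ++ b :: js = (P ++ [b]) ++ js := by simp
    by_cases hc : (st.2.contains (chk (b, i))) = false ∧ chk (b, i) ≠ 0
    · rw [if_pos hc]
      have hl1 : 1 ≤ chk (b, i) := by
        have := (hb (b, i)).1
        have := hc.2
        omega
      have hl2 : chk (b, i) ≤ (lst.length : Int) := (hb (b, i)).2
      have hk0 : ((chk (b, i) - 1).toNat : Int) = chk (b, i) - 1 := by omega
      have hk0lt : (chk (b, i) - 1).toNat < lst.length := by omega
      have hnotP : ¬ ∃ j ∈ P, chk (j, i) = chk (b, i) := by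
        intro hex
        have := (h1 (chk (b, i))).mpr ⟨hc.2, hex⟩
        rw [hc.1] at this
        cases this
      rw [hli]
      apply ih (P ++ [b])
      · intro l'
        rw [PySem.Dict.contains_insert]
        simp only [Bool.or_eq_true, beq_iff_eq]
        constructor
        · rintro (rfl | hold)
          · exact ⟨hc.2, b, List.mem_append.mpr (Or.inr (List.mem_singleton_self b)), rfl⟩
          · obtain ⟨hne, j', hj', hv⟩ := (h1 l').mp hold
            exact ⟨hne, j', List.mem_append.mpr (Or.inl hj'), hv⟩
        · rintro ⟨hne, j', hj', hv⟩
          rcases List.mem_append.mp hj' with hj' | hj'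
          · exact Or.inr ((h1 l').mpr ⟨hne, j', hj', hv⟩)
          · rw [List.mem_singleton] at hj'
            subst hj'
            exact Or.inl hv.symm
      · have hset : (Finset.range lst.length).filter
              (fun k : ℕ => ∃ j ∈ P ++ [b], chk (j, i) = (k : ℤ) + 1) =
            insert (chk (b, i) - 1).toNat ((Finset.range lst.length).filter
              (fun k : ℕ => ∃ j ∈ P, chk (j, i) = (k : ℤ) + 1)) := by
          ext k
          simp only [Finset.mem_insert, Finset.mem_filter, Finset.mem_range]
          constructor
          · rintro ⟨hk, j', hj', hv⟩
            rcases List.mem_append.mp hj' with hj' | hj'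
            · exact Or.inr ⟨hk, j', hj', hv⟩
            · rw [List.mem_singleton] at hj'
              subst hj'
              left
              omega
          · rintro (rfl | ⟨hk, j', hj', hv⟩)
            · exact ⟨hk0lt, b, List.mem_append.mpr (Or.inr (List.mem_singleton_self b)),
                by omega⟩
            · exact ⟨hk, j', List.mem_append.mpr (Or.inl hj'), hv⟩
        have hnotmem : (chk (b, i) - 1).toNat ∉ (Finset.range lst.length).filter
            (fun k : ℕ => ∃ j ∈ P, chk (j, i) = (k : ℤ) + 1) := by
          simp only [Finset.mem_filter, Finset.mem_range]
          rintro ⟨_, j', hj', hv⟩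
          exact hnotP ⟨j', hj', by omega⟩
        rw [hset, Finset.sum_insert hnotmem, h2, pv_getD_cast lst (chk (b, i)) hl1]
        ring
    · rw [if_neg hc]
      have hsame : ∀ l', l' ≠ 0 → ((∃ j ∈ P ++ [b], chk (j, i) = l') ↔
          (∃ j ∈ P, chk (j, i) = l')) := by
        intro l' hne
        constructor
        · rintro ⟨j', hj', hv⟩
          rcases List.mem_append.mp hj' with hj' | hj'
          · exact ⟨j', hj', hv⟩
          · rw [List.mem_singleton] at hj'
            subst hj'
            rcases not_and_or.mp hc with hcc | hcc
            · rw [Bool.not_eq_false] at hcc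
              obtain ⟨_, w, hw, hwv⟩ := (h1 _).mp hcc
              exact ⟨w, hw, by rw [hwv, hv]⟩
            · rw [not_not] at hcc
              exact absurd (hv ▸ hcc) hne
        · rintro ⟨j', hj', hv⟩
          exact ⟨j', List.mem_append.mpr (Or.inl hj'), hv⟩
      rw [hli]
      apply ih (P ++ [b])
      · intro l'
        rw [h1 l']
        constructor
        · rintro ⟨hne, hex⟩
          exact ⟨hne, (hsame l' hne).mpr hex⟩
        · rintro ⟨hne, hex⟩
          exact ⟨hne, (hsame l' hne).mp hex⟩
      · rw [h2]
        apply Finset.sum_congr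
        · apply Finset.filter_congr
          intro k _
          exact (hsame ((k : ℤ) + 1) (by omega)).symm
        · intro x _
          rfl

lemma pvColA_eq (n i : Int) (chk : (Int × Int) → Int) (lst : List Int)
    (hb : ∀ u, 0 ≤ chk u ∧ chk u ≤ (lst.length : Int)) :
    pvColA n chk lst i = ∑ k ∈ (Finset.range lst.length).filter
        (fun k : ℕ => ∃ j ∈ PySem.List.pyRange 0 n 1, chk (j, i) = (k : ℤ) + 1),
      lst.getD k 0 := by
  unfold pvColA
  have := pvColA_fold i chk lst hb (PySem.List.pyRange 0 n 1) [] (0, PySem.Dict.empty)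
    (by intro l; simp [PySem.Dict.contains_empty])
    (by simp)
  simpa using this

lemma pv_foldl_grid {α : Type} (n m : Int) (g : α → (Int × Int) → α) (init : α) :
    (PySem.List.pyRange 0 n 1).foldl (fun a x =>
      (PySem.List.pyRange 0 m 1).foldl (fun a y => g a (x, y)) a) init =
    (pvGridList n m).foldl g init := by
  unfold pvGridList
  generalize PySem.List.pyRange 0 n 1 = L
  induction L generalizing init with
  | nil => rfl
  | cons x L ih =>
    simp only [List.flatMap_cons, List.foldl_cons, List.foldl_append, List.foldl_map]
    rw [ih]
-- ===== A's scan, characterised: labelled components =====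
def pvStOK (land : List (List Int)) (n m : Int) (st : ((Int × Int) → Int) × List Int) : Prop :=
  pvClosed land n m st.1 ∧
  (∀ u, st.1 u ≠ 0 → pvGood land n m u) ∧
  (∀ u, 0 ≤ st.1 u ∧ st.1 u ≤ (st.2.length : Int)) ∧
  (∀ v ∈ st.2, 0 ≤ v)

def pvSeedStep (land : List (List Int)) (n m : Int)
    (st : ((Int × Int) → Int) × List Int) (p : Int × Int) : ((Int × Int) → Int) × List Int :=
  if pvLandAt land p.1 p.2 = 1 ∧ st.1 p = 0 then
    ((pvBfsA land n m ((st.2.length : Int) + 1) (by omega)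
        (Function.update st.1 p ((st.2.length : Int) + 1)) [p] 0).1,
     st.2 ++ [(pvBfsA land n m ((st.2.length : Int) + 1) (by omega)
        (Function.update st.1 p ((st.2.length : Int) + 1)) [p] 0).2])
  else st

lemma pvScanA_grid (land : List (List Int)) (n m : Int) :
    pvScanA land n m = (pvGridList n m).foldl (pvSeedStep land n m) ((fun _ => 0), []) := by
  exact pv_foldl_grid n m (pvSeedStep land n m) ((fun _ => 0), [])

def pvScanInvA (land : List (List Int)) (n m : Int) (P : List (Int × Int))
    (st : ((Int × Int) → Int) × List Int) : Prop :=
  pvStOK land n m st ∧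
  ∃ reps : List (Int × Int),
    st.2.length = reps.length ∧
    (∀ l : Nat, l < reps.length →
        pvGood land n m (reps.getD l (0, 0)) ∧
        pvLandAt land (reps.getD l (0, 0)).1 (reps.getD l (0, 0)).2 = 1) ∧
    (∀ l : Nat, l < reps.length → ∀ u,
        (st.1 u = (l : Int) + 1 ↔ pvReach land n m (reps.getD l (0, 0)) u)) ∧
    (∀ l : Nat, l < reps.length → ∃ S : Finset (Int × Int),
        (∀ u, u ∈ S ↔ pvReach land n m (reps.getD l (0, 0)) u) ∧
        st.2.getD l 0 = (S.card : Int)) ∧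
    (∀ u ∈ P, pvLandAt land u.1 u.2 = 1 → st.1 u ≠ 0)

lemma pvGetD_snoc_lt {α : Type} (L : List α) (x d : α) (l : Nat) (h : l < L.length) :
    (L ++ [x]).getD l d = L.getD l d :=
  List.getD_append L [x] d l h

lemma pvGetD_snoc_eq {α : Type} (L : List α) (x d : α) :
    (L ++ [x]).getD L.length d = x := by
  rw [List.getD_eq_getElem?_getD, List.getElem?_append_right (le_refl _)]
  simp

lemma pvSeedStep_inv (land : List (List Int)) (n m : Int) (P : List (Int × Int))
    (st : ((Int × Int) → Int) × List Int) (p : Int × Int) (hp : p ∈ pvGridList n m)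
    (h : pvScanInvA land n m P st) :
    pvScanInvA land n m (P ++ [p]) (pvSeedStep land n m st p) := by
  obtain ⟨⟨hcl, hgood, hbound, hnn⟩, reps, hlen, hreps, hlab, hcard, hcomp⟩ := h
  rw [pv_mem_gridList] at hp
  unfold pvSeedStep
  by_cases hc : pvLandAt land p.1 p.2 = 1 ∧ st.1 p = 0
  · rw [if_pos hc]
    have hgs : pvGood land n m p :=
      ⟨hp.1, hp.2.1, hp.2.2.1, hp.2.2.2, by rw [hc.1]; exact one_ne_zero⟩
    obtain ⟨S', hS', heq⟩ := pvFloodA land n m ((st.2.length : Int) + 1)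
      (by omega) st.1 p hcl hgs hc.2
    rw [heq]
    have hclosed' : ∀ u v, u ∈ S' → pvAdj land n m u v → v ∈ S' :=
      fun u v hu hadj => (hS' v).mpr (pvReach_adj land n m p u v ((hS' u).mp hu) hadj)
    refine ⟨⟨?_, ?_, ?_, ?_⟩, reps ++ [p], by simp [hlen], ?_, ?_, ?_, ?_⟩ <;> (try dsimp only)
    · -- closed
      intro u v hu hadj
      dsimp only at hu ⊢
      by_cases hvS : v ∈ S'
      · rw [if_pos hvS]
        omega
      · rw [if_neg hvS]
        by_cases huS : u ∈ S'
        · exact absurd (hclosed' u v huS hadj) hvS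
        · rw [if_neg huS] at hu
          exact hcl u v hu hadj
    · -- good
      intro u hu
      by_cases huS : u ∈ S'
      · exact pvReach_good land n m p u hgs ((hS' u).mp huS)
      · rw [if_neg huS] at hu
        exact hgood u hu
    · -- bounds
      intro u
      simp only [List.length_append, List.length_cons, List.length_nil]
      by_cases huS : u ∈ S'
      · rw [if_pos huS]
        push_cast
        omega
      · rw [if_neg huS]
        have := hbound u
        push_cast
        omega
    · -- list entries nonnegative
      intro v hv
      rcases List.mem_append.mp hv with hv | hv
      · exact hnn v hv
      · rw [List.mem_singleton] at hv
        subst hv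
        positivity
    · -- reps are good 1-cells
      intro l hl
      simp only [List.length_append, List.length_cons, List.length_nil] at hl
      by_cases hll : l < reps.length
      · rw [pvGetD_snoc_lt _ _ _ _ hll]
        exact hreps l hll
      · have hleq : l = reps.length := by omega
        subst hleq
        rw [pvGetD_snoc_eq]
        exact ⟨hgs, hc.1⟩
    · -- labels characterise components
      intro l hl u
      simp only [List.length_append, List.length_cons, List.length_nil] at hl
      by_cases hll : l < reps.length
      · rw [pvGetD_snoc_lt _ _ _ _ hll]
        have hlL : l < st.2.length := by omega
        constructor
        · intro hval
          by_cases huS : u ∈ S'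
          · rw [if_pos huS] at hval
            omega
          · rw [if_neg huS] at hval
            exact (hlab l hll u).mp hval
        · intro hre
          have hval := (hlab l hll u).mpr hre
          have huS : u ∉ S' := by
            intro huS
            have hrp : pvReach land n m (reps.getD l (0, 0)) p :=
              hre.trans (pvReach_symm land n m p u ((hS' u).mp huS))
            have h0 := (hlab l hll p).mpr hrp
            rw [hc.2] at h0
            omega
          rw [if_neg huS]
          exact hval
      · have hleq : l = reps.length := by omega
        subst hleq
        rw [pvGetD_snoc_eq]
        constructor
        · intro hval
          by_cases huS : u ∈ S'
          · exact (hS' u).mp huS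
          · rw [if_neg huS] at hval
            have := (hbound u).2
            omega
        · intro hre
          rw [if_pos ((hS' u).mpr hre)]
          omega
    · -- sizes
      intro l hl
      simp only [List.length_append, List.length_cons, List.length_nil] at hl
      by_cases hll : l < reps.length
      · obtain ⟨S, hSm, hSc⟩ := hcard l hll
        refine ⟨S, ?_, ?_⟩
        · rw [pvGetD_snoc_lt _ _ _ _ hll]
          exact hSm
        · rw [pvGetD_snoc_lt _ _ _ _ (by omega : l < st.2.length)]
          exact hSc
      · have hleq : l = reps.length := by omega
        subst hleq
        refine ⟨S', ?_, ?_⟩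
        · rw [pvGetD_snoc_eq]
          exact hS'
        · rw [show reps.length = st.2.length from hlen.symm, pvGetD_snoc_eq]
    · -- processed 1-cells are labelled
      intro u hu h1
      rcases List.mem_append.mp hu with hu | hu
      · have hne := hcomp u hu h1
        by_cases huS : u ∈ S'
        · rw [if_pos huS]
          omega
        · rw [if_neg huS]
          exact hne
      · rw [List.mem_singleton] at hu
        subst hu
        rw [if_pos ((hS' u).mpr Relation.ReflTransGen.refl)]
        omega
  · rw [if_neg hc]
    refine ⟨⟨hcl, hgood, hbound, hnn⟩, reps, hlen, hreps, hlab, hcard, ?_⟩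
    intro u hu h1
    rcases List.mem_append.mp hu with hu | hu
    · exact hcomp u hu h1
    · rw [List.mem_singleton] at hu
      subst hu
      exact fun h0 => hc ⟨h1, h0⟩


lemma pv_foldl_prefix_inv {α β : Type} (f : α → β → α) (I : List β → α → Prop)
    (l : List β) (hstep : ∀ P a b, b ∈ l → I P a → I (P ++ [b]) (f a b)) :
    ∀ (P : List β) (a : α), I P a → I (P ++ l) (l.foldl f a) := by
  induction l with
  | nil => intro P a h; simpa using h
  | cons b l ih =>
    intro P a h
    have h1 := hstep P a b List.mem_cons_self h
    have h2 := ih (fun P a b hb => hstep P a b (List.mem_cons_of_mem _ hb)) (P ++ [b]) _ h1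
    simpa using h2

lemma pvScanA_char (land : List (List Int)) (n m : Int) :
    pvScanInvA land n m (pvGridList n m) (pvScanA land n m) := by
  rw [pvScanA_grid]
  have h0 : pvScanInvA land n m [] ((fun _ => 0), []) := by
    refine ⟨⟨?_, ?_, ?_, ?_⟩, [], by simp, by simp, by simp, by simp, by simp⟩
    · intro u v hu; exact absurd rfl hu
    · intro u hu; exact absurd rfl hu
    · intro u; simp
    · intro v hv; cases hv
  have := pv_foldl_prefix_inv (pvSeedStep land n m) (pvScanInvA land n m)
    (pvGridList n m) (fun P a b hb h => pvSeedStep_inv land n m P a b hb h) [] _ h0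
  simpa using this

-- ===== index / pair bridge =====
def pvToPair (m k : Nat) : Int × Int := (((k / m : Nat) : Int), ((k % m : Nat) : Int))

def pvFromPair (m : Nat) (p : Int × Int) : Nat := p.1.toNat * m + p.2.toNat

def pvGoodI (land : List (List Int)) (n m k : Nat) : Prop :=
  k < n * m ∧ pvAtIdx land m k ≠ 0

lemma pvAt_toPair (land : List (List Int)) (m k : Nat) :
    pvLandAt land ((k / m : Nat) : Int) ((k % m : Nat) : Int) = pvAtIdx land m k := by
  simp only [pvLandAt, pvAtIdx, PySem.List.pyGetD_natCast]

lemma pvGood_toPair (land : List (List Int)) (n m k : Nat) (hk : k < n * m) :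
    pvGood land (n : Int) (m : Int) (pvToPair m k) ↔ pvAtIdx land m k ≠ 0 := by
  have hm : 0 < m := by
    rcases Nat.eq_zero_or_pos m with h | h
    · subst h; simp at hk
    · exact h
  have hdiv : k / m < n := Nat.div_lt_of_lt_mul (by rw [Nat.mul_comm]; exact hk)
  have hmod : k % m < m := Nat.mod_lt k hm
  simp only [pvGood, pvToPair, pvAt_toPair]
  constructor
  · rintro ⟨_, _, _, _, h⟩; exact h
  · intro h
    refine ⟨by positivity, by exact_mod_cast hdiv, by positivity, by exact_mod_cast hmod, h⟩

lemma pvFromPair_toPair (m k : Nat) (hm : 0 < m) : pvFromPair m (pvToPair m k) = k := by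
  simp only [pvFromPair, pvToPair, Int.toNat_natCast]
  have h := Nat.div_add_mod k m
  rw [Nat.mul_comm] at h
  omega

lemma pvToPair_fromPair (n m : Nat) (p : Int × Int)
    (hp : 0 ≤ p.1 ∧ p.1 < (n : Int) ∧ 0 ≤ p.2 ∧ p.2 < (m : Int)) :
    pvToPair m (pvFromPair m p) = p := by
  obtain ⟨a, b⟩ := p
  obtain ⟨h1, h2, h3, h4⟩ := hp
  have hm : 0 < m := by omega
  have hb : b.toNat < m := by omega
  have hd : (a.toNat * m + b.toNat) / m = a.toNat := by
    rw [Nat.add_comm, Nat.add_mul_div_right _ _ hm, Nat.div_eq_of_lt hb, Nat.zero_add]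
  have hmo : (a.toNat * m + b.toNat) % m = b.toNat := by
    rw [Nat.add_comm, Nat.add_mul_mod_self_right, Nat.mod_eq_of_lt hb]
  simp only [pvToPair, pvFromPair, hd, hmo, Prod.mk.injEq]
  omega

lemma pvFromPair_lt (n m : Nat) (p : Int × Int)
    (hp : 0 ≤ p.1 ∧ p.1 < (n : Int) ∧ 0 ≤ p.2 ∧ p.2 < (m : Int)) :
    pvFromPair m p < n * m := by
  obtain ⟨h1, h2, h3, h4⟩ := hp
  have hb : p.2.toNat < m := by omega
  have ha : p.1.toNat + 1 ≤ n := by omega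
  calc pvFromPair m p < p.1.toNat * m + m := by unfold pvFromPair; omega
    _ = (p.1.toNat + 1) * m := by ring
    _ ≤ n * m := Nat.mul_le_mul_right m ha

lemma pvGood_fromPair (land : List (List Int)) (n m : Nat) (p : Int × Int)
    (hg : pvGood land (n : Int) (m : Int) p) : pvGoodI land n m (pvFromPair m p) := by
  obtain ⟨h1, h2, h3, h4, h5⟩ := hg
  have hlt := pvFromPair_lt n m p ⟨h1, h2, h3, h4⟩
  refine ⟨hlt, ?_⟩
  have ht := pvToPair_fromPair n m p ⟨h1, h2, h3, h4⟩
  have := pvAt_toPair land m (pvFromPair m p)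
  rw [show ((pvFromPair m p / m : Nat) : Int) = p.1 from by rw [← congrArg Prod.fst ht]; rfl,
      show ((pvFromPair m p % m : Nat) : Int) = p.2 from by rw [← congrArg Prod.snd ht]; rfl] at this
  rw [← this]
  exact h5

-- the (undirected) edges Source B's union loop processes, directed high-to-low
def pvEdge (land : List (List Int)) (n m : Nat) (u v : Nat) : Prop :=
  u < n * m ∧ pvAtIdx land m u ≠ 0 ∧ pvAtIdx land m v ≠ 0 ∧
  ((m ≤ u ∧ v = u - m) ∨ (u % m ≠ 0 ∧ v = u - 1))

lemma pvEdge_adj (land : List (List Int)) (n m : Nat) (u v : Nat)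
    (he : pvEdge land n m u v) :
    pvAdj land (n : Int) (m : Int) (pvToPair m u) (pvToPair m v) := by
  obtain ⟨hu, hau, hav, hcase⟩ := he
  have hm : 0 < m := by
    rcases Nat.eq_zero_or_pos m with h | h
    · subst h; simp at hu
    · exact h
  rcases hcase with ⟨hge, rfl⟩ | ⟨hmod, rfl⟩
  · -- vertical: v = u - m
    obtain ⟨q', hq'⟩ : ∃ q', u / m = q' + 1 := by
      refine ⟨u / m - 1, ?_⟩
      have : 1 ≤ u / m := (Nat.one_le_div_iff hm).mpr hge
      omega
    have hu_eq : u = m * (q' + 1) + u % m := by rw [← hq']; exact (Nat.div_add_mod u m).symm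
    have hexp : m * (q' + 1) = m * q' + m := by ring
    have hsub : u - m = m * q' + u % m := by omega
    have hd : (u - m) / m = q' := by
      rw [hsub, Nat.mul_add_div hm, Nat.div_eq_of_lt (Nat.mod_lt u hm), Nat.add_zero]
    have hmo : (u - m) % m = u % m := by
      rw [hsub, Nat.add_comm, Nat.add_mul_mod_self_left,
        Nat.mod_eq_of_lt (Nat.mod_lt u hm)]
    refine ⟨(pvGood_toPair land n m u hu).mpr hau,
            (pvGood_toPair land n m (u - m) (by omega)).mpr hav, ?_⟩
    simp only [pvToPair, pvDirs, hd, hmo, hq', List.mem_cons, Prod.mk.injEq]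
    left
    constructor <;> push_cast <;> omega
  · -- horizontal: v = u - 1
    have hr1 : 1 ≤ u % m := by omega
    have hmlt : u % m < m := Nat.mod_lt u hm
    have hu_eq : u = m * (u / m) + u % m := (Nat.div_add_mod u m).symm
    have hsub : u - 1 = m * (u / m) + (u % m - 1) := by omega
    have hd : (u - 1) / m = u / m := by
      rw [hsub, Nat.mul_add_div hm, Nat.div_eq_of_lt (by omega : u % m - 1 < m), Nat.add_zero]
    have hmo : (u - 1) % m = u % m - 1 := by
      rw [hsub, Nat.add_comm, Nat.add_mul_mod_self_left,
        Nat.mod_eq_of_lt (by omega : u % m - 1 < m)]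
    refine ⟨(pvGood_toPair land n m u hu).mpr hau,
            (pvGood_toPair land n m (u - 1) (by omega)).mpr hav, ?_⟩
    simp only [pvToPair, pvDirs, hd, hmo, List.mem_cons, Prod.mk.injEq]
    right; right; left
    constructor <;> push_cast <;> omega

lemma pvAdj_edge (land : List (List Int)) (n m : Nat) (p q : Int × Int)
    (ha : pvAdj land (n : Int) (m : Int) p q) :
    pvEdge land n m (pvFromPair m p) (pvFromPair m q) ∨
    pvEdge land n m (pvFromPair m q) (pvFromPair m p) := by
  obtain ⟨hgp, hgq, hoff⟩ := ha
  obtain ⟨a, b⟩ := p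
  obtain ⟨c, d⟩ := q
  obtain ⟨hp1, hp2, hp3, hp4, hp5⟩ := hgp
  obtain ⟨hq1, hq2, hq3, hq4, hq5⟩ := hgq
  have hm : 0 < m := by omega
  have hKp := pvGood_fromPair land n m (a, b) ⟨hp1, hp2, hp3, hp4, hp5⟩
  have hKq := pvGood_fromPair land n m (c, d) ⟨hq1, hq2, hq3, hq4, hq5⟩
  simp only [pvDirs, List.mem_cons, Prod.mk.injEq, List.not_mem_nil, or_false] at hoff
  simp only [pvFromPair] at hKp hKq ⊢
  rcases hoff with ⟨h1, h2⟩ | ⟨h1, h2⟩ | ⟨h1, h2⟩ | ⟨h1, h2⟩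
  · -- c = a - 1, d = b : q above p, edge p -> q
    left
    have ha' : a.toNat = c.toNat + 1 := by omega
    have hd' : d.toNat = b.toNat := by omega
    have hexp : (c.toNat + 1) * m = c.toNat * m + m := by ring
    refine ⟨hKp.1, hKp.2, hKq.2, Or.inl ⟨?_, ?_⟩⟩
    · rw [ha', hexp]; omega
    · rw [ha', hd', hexp]; omega
  · -- c = a + 1 : p above q, edge q -> p
    right
    have hc' : c.toNat = a.toNat + 1 := by omega
    have hd' : d.toNat = b.toNat := by omega
    have hexp : (a.toNat + 1) * m = a.toNat * m + m := by ring
    refine ⟨hKq.1, hKq.2, hKp.2, Or.inl ⟨?_, ?_⟩⟩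
    · rw [hc', hexp]; omega
    · rw [hc', hd', hexp]; omega
  · -- d = b - 1 : q left of p, edge p -> q
    left
    have hmodp : (a.toNat * m + b.toNat) % m = b.toNat := by
      rw [Nat.add_comm, Nat.add_mul_mod_self_right, Nat.mod_eq_of_lt (by omega)]
    have hc' : c.toNat = a.toNat := by omega
    have hd' : d.toNat = b.toNat - 1 := by omega
    refine ⟨hKp.1, hKp.2, hKq.2, Or.inr ⟨?_, ?_⟩⟩
    · rw [hmodp]; omega
    · rw [hc', hd']; omega
  · -- d = b + 1 : p left of q, edge q -> p
    right
    have hmodq : (c.toNat * m + d.toNat) % m = d.toNat := by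
      rw [Nat.add_comm, Nat.add_mul_mod_self_right, Nat.mod_eq_of_lt (by omega)]
    have hc' : c.toNat = a.toNat := by omega
    have hd' : d.toNat = b.toNat + 1 := by omega
    refine ⟨hKq.1, hKq.2, hKp.2, Or.inr ⟨?_, ?_⟩⟩
    · rw [hmodq]; omega
    · rw [hc', hd']; omega

-- ===== find =====
lemma pvFindFuel_eq (p : Nat → Nat) (hp : ∀ x, p x ≤ x) :
    ∀ (k f : Nat), k < f → pvFindFuel p f k = pvFind p k := by
  intro k
  induction k using Nat.strong_induction_on with
  | _ k ih =>
    intro f hf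
    match f, hf with
    | f + 1, _ =>
      by_cases hpk : p k = k
      · simp [pvFindFuel, pvFind, hpk]
      · have hlt : p k < k := lt_of_le_of_ne (hp k) hpk
        have h1 : pvFindFuel p (f + 1) k = pvFindFuel p f (p k) := by
          simp [pvFindFuel, hpk]
        have h2 : pvFind p k = pvFindFuel p k (p k) := by
          simp [pvFind, pvFindFuel, hpk]
        rw [h1, h2, ih (p k) hlt f (by omega), ih (p k) hlt k (by omega)]

lemma pvFind_unfold (p : Nat → Nat) (hp : ∀ x, p x ≤ x) (k : Nat) :
    pvFind p k = if p k = k then k else pvFind p (p k) := by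
  by_cases hpk : p k = k
  · simp [pvFind, pvFindFuel, hpk]
  · have hlt : p k < k := lt_of_le_of_ne (hp k) hpk
    rw [if_neg hpk,
      show pvFind p k = pvFindFuel p (k + 1) k from rfl,
      show pvFindFuel p (k + 1) k = pvFindFuel p k (p k) from by simp [pvFindFuel, hpk],
      pvFindFuel_eq p hp (p k) k hlt]

lemma pvFind_le (p : Nat → Nat) (hp : ∀ x, p x ≤ x) (k : Nat) : pvFind p k ≤ k := by
  induction k using Nat.strong_induction_on with
  | _ k ih =>
    rw [pvFind_unfold p hp k]
    by_cases hpk : p k = k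
    · simp [hpk]
    · have hlt : p k < k := lt_of_le_of_ne (hp k) hpk
      rw [if_neg hpk]
      exact le_trans (ih _ hlt) (le_of_lt hlt)

lemma pvFind_root (p : Nat → Nat) (hp : ∀ x, p x ≤ x) (k : Nat) :
    p (pvFind p k) = pvFind p k := by
  induction k using Nat.strong_induction_on with
  | _ k ih =>
    rw [pvFind_unfold p hp k]
    by_cases hpk : p k = k
    · rw [if_pos hpk]; exact hpk
    · have hlt : p k < k := lt_of_le_of_ne (hp k) hpk
      rw [if_neg hpk]
      exact ih _ hlt

lemma pvFind_of_root (p : Nat → Nat) (r : Nat) (hr : p r = r) : pvFind p r = r := by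
  simp [pvFind, pvFindFuel, hr]

lemma pvFind_collapse (p : Nat → Nat) (hp : ∀ x, p x ≤ x) (lo hi : Nat)
    (hhi : p hi = hi) (hlo : p lo = lo) (hlt : lo < hi) (k : Nat) :
    pvFind (Function.update p hi lo) k = if pvFind p k = hi then lo else pvFind p k := by
  have hne : lo ≠ hi := by omega
  have hp' : ∀ x, Function.update p hi lo x ≤ x := by
    intro x
    by_cases hx : x = hi
    · subst hx; rw [Function.update_self]; omega
    · rw [Function.update_of_ne hx]; exact hp x
  induction k using Nat.strong_induction_on with
  | _ k ih =>
    by_cases hpk : p k = k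
    · have hfk : pvFind p k = k := pvFind_of_root p k hpk
      by_cases hk : k = hi
      · rw [hfk, if_pos hk, hk, pvFind_unfold _ hp' hi, Function.update_self, if_neg hne]
        exact pvFind_of_root _ lo (by rw [Function.update_of_ne hne]; exact hlo)
      · have h1 : pvFind (Function.update p hi lo) k = k :=
          pvFind_of_root _ k (by rw [Function.update_of_ne hk]; exact hpk)
        rw [h1, hfk, if_neg hk]
    · have hlt : p k < k := lt_of_le_of_ne (hp k) hpk
      have hkhi : k ≠ hi := fun h => hpk (by rw [h, hhi, ← h])
      have h1 : pvFind (Function.update p hi lo) k =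
          pvFind (Function.update p hi lo) (p k) := by
        rw [pvFind_unfold _ hp' k, Function.update_of_ne hkhi, if_neg hpk]
      have h2 : pvFind p k = pvFind p (p k) := by
        rw [pvFind_unfold _ hp k, if_neg hpk]
      rw [h1, h2, ih _ hlt]

-- ===== the union-find invariant =====
def pvUFInv (land : List (List Int)) (n m t : Nat)
    (s : (Nat → Nat) × (Nat → Int) × (Nat → Bool)) : Prop :=
  (∀ x, s.1 x ≤ x) ∧
  (∀ a b, pvFind s.1 a = pvFind s.1 b → a = b ∨
     (pvGoodI land n m a ∧ pvGoodI land n m b ∧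
      pvReach land (n : Int) (m : Int) (pvToPair m a) (pvToPair m b))) ∧
  (∀ u v, pvEdge land n m u v → u < t → pvFind s.1 u = pvFind s.1 v) ∧
  (∀ r, r < n * m → s.1 r = r →
     s.2.1 r = (((Finset.range (n * m)).filter (fun k => pvFind s.1 k = r)).card : Int)) ∧
  (∀ r, r < n * m → s.1 r = r →
     (s.2.2 r = true ↔ ∃ k, k < n * m ∧ pvFind s.1 k = r ∧ pvAtIdx land m k = 1))

lemma pvUFInv_init (land : List (List Int)) (n m : Nat) :
    pvUFInv land n m 0 ((fun x => x), (fun _ => 1), (fun k => pvAtIdx land m k == 1)) := by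
  have hid : ∀ k, pvFind (fun x => x) k = k := fun k => pvFind_of_root _ k rfl
  refine ⟨fun x => le_refl x, ?_, ?_, ?_, ?_⟩
  · intro a b h
    rw [hid, hid] at h
    exact Or.inl h
  · intro u v _ hu
    omega
  · intro r hr _
    have : (Finset.range (n * m)).filter (fun k => pvFind (fun x => x) k = r) = {r} := by
      ext k
      simp only [Finset.mem_filter, Finset.mem_range, Finset.mem_singleton, hid]
      constructor
      · rintro ⟨_, h⟩; exact h
      · rintro rfl; exact ⟨hr, rfl⟩
    rw [this]
    simp
  · intro r hr _
    simp only [beq_iff_eq]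
    constructor
    · intro h
      exact ⟨r, hr, hid r, h⟩
    · rintro ⟨k, hk, hkr, h1⟩
      rw [hid] at hkr
      subst hkr
      exact h1

lemma pvUnion_inv (land : List (List Int)) (n m t : Nat)
    (s : (Nat → Nat) × (Nat → Int) × (Nat → Bool)) (hinv : pvUFInv land n m t s)
    (a b : Nat) (ha : pvGoodI land n m a) (hb : pvGoodI land n m b)
    (hr : pvReach land (n : Int) (m : Int) (pvToPair m a) (pvToPair m b)) :
    pvUFInv land n m t (pvUnion s a b) ∧
    pvFind (pvUnion s a b).1 a = pvFind (pvUnion s a b).1 b ∧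
    (∀ x y, pvFind s.1 x = pvFind s.1 y →
      pvFind (pvUnion s a b).1 x = pvFind (pvUnion s a b).1 y) := by
  obtain ⟨hp, hsound, hproc, hsz, hone⟩ := hinv
  by_cases hab : pvFind s.1 a = pvFind s.1 b
  · simp only [pvUnion]
    rw [if_neg (not_not_intro hab)]
    exact ⟨⟨hp, hsound, hproc, hsz, hone⟩, hab, fun x y h => h⟩
  · simp only [pvUnion]
    rw [if_pos hab]
    set ra := pvFind s.1 a with hra
    set rb := pvFind s.1 b with hrb
    set lo := if ra < rb then ra else rb with hlodef
    set hi := if ra < rb then rb else ra with hhidef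
    have hra_root : s.1 ra = ra := pvFind_root s.1 hp a
    have hrb_root : s.1 rb = rb := pvFind_root s.1 hp b
    have hlo_root : s.1 lo = lo := by rw [hlodef]; split_ifs <;> assumption
    have hhi_root : s.1 hi = hi := by rw [hhidef]; split_ifs <;> assumption
    have hlt : lo < hi := by
      rw [hlodef, hhidef]
      by_cases hc : ra < rb
      · rw [if_pos hc, if_pos hc]; exact hc
      · rw [if_neg hc, if_neg hc]; omega
    have hselect : (ra = lo ∧ rb = hi) ∨ (ra = hi ∧ rb = lo) := by
      rw [hlodef, hhidef]
      by_cases hc : ra < rb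
      · rw [if_pos hc, if_pos hc]; exact Or.inl ⟨rfl, rfl⟩
      · rw [if_neg hc, if_neg hc]; exact Or.inr ⟨rfl, rfl⟩
    have C : ∀ k, pvFind (Function.update s.1 hi lo) k =
        if pvFind s.1 k = hi then lo else pvFind s.1 k :=
      pvFind_collapse s.1 hp lo hi hhi_root hlo_root hlt
    have haN : a < n * m := ha.1
    have hbN : b < n * m := hb.1
    have hfle_a : ra ≤ a := pvFind_le s.1 hp a
    have hfle_b : rb ≤ b := pvFind_le s.1 hp b
    have hloN : lo < n * m := by rcases hselect with ⟨h1, h2⟩ | ⟨h1, h2⟩ <;> omega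
    have hhiN : hi < n * m := by rcases hselect with ⟨h1, h2⟩ | ⟨h1, h2⟩ <;> omega
    have hto : ∀ z c, pvGoodI land n m c → pvFind s.1 z = pvFind s.1 c →
        pvGoodI land n m z ∧ pvReach land (n : Int) (m : Int) (pvToPair m z) (pvToPair m c) := by
      intro z c hc h
      rcases hsound z c h with rfl | ⟨h1, _, h3⟩
      · exact ⟨hc, Relation.ReflTransGen.refl⟩
      · exact ⟨h1, h3⟩
    obtain ⟨u, v, hgu, hgv, huv, hfu, hfv⟩ :
        ∃ u v, pvGoodI land n m u ∧ pvGoodI land n m v ∧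
          pvReach land (n : Int) (m : Int) (pvToPair m u) (pvToPair m v) ∧
          pvFind s.1 u = lo ∧ pvFind s.1 v = hi := by
      rcases hselect with ⟨h1, h2⟩ | ⟨h1, h2⟩
      · exact ⟨a, b, ha, hb, hr, h1, h2⟩
      · exact ⟨b, a, hb, ha, pvReach_symm land (n : Int) (m : Int) _ _ hr, h2, h1⟩
    have hpres : ∀ x y, pvFind s.1 x = pvFind s.1 y →
        pvFind (Function.update s.1 hi lo) x = pvFind (Function.update s.1 hi lo) y := by
      intro x y h
      rw [C x, C y, h]
    have hval : ∀ z, pvFind s.1 z = lo ∨ pvFind s.1 z = hi →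
        pvFind (Function.update s.1 hi lo) z = lo := by
      intro z hz
      rw [C z]
      rcases hz with h | h
      · rw [h, if_neg (by omega)]
      · rw [h, if_pos rfl]
    have hfa2 : ra = lo ∨ ra = hi := by rcases hselect with ⟨h1, _⟩ | ⟨h1, _⟩ <;> [exact Or.inl h1; exact Or.inr h1]
    have hfb2 : rb = lo ∨ rb = hi := by rcases hselect with ⟨_, h2⟩ | ⟨_, h2⟩ <;> [exact Or.inr h2; exact Or.inl h2]
    refine ⟨⟨?_, ?_, ?_, ?_, ?_⟩, ?_, hpres⟩ <;> dsimp only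
    · -- parent decreases
      intro x
      by_cases hx : x = hi
      · subst hx; rw [Function.update_self]; omega
      · rw [Function.update_of_ne hx]; exact hp x
    · -- soundness
      intro x y hxy
      rw [C x, C y] at hxy
      by_cases hx : pvFind s.1 x = hi <;> by_cases hy : pvFind s.1 y = hi
      · exact hsound x y (hx.trans hy.symm)
      · rw [if_pos hx, if_neg hy] at hxy
        obtain ⟨hgx, hrxv⟩ := hto x v hgv (hx.trans hfv.symm)
        obtain ⟨hgy, hryu⟩ := hto y u hgu (hxy.symm.trans hfu.symm)
        exact Or.inr ⟨hgx, hgy, hrxv.trans ((pvReach_symm land _ _ _ _ huv).trans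
          (pvReach_symm land _ _ _ _ hryu))⟩
      · rw [if_neg hx, if_pos hy] at hxy
        obtain ⟨hgx, hrxu⟩ := hto x u hgu (hxy.trans hfu.symm)
        obtain ⟨hgy, hryv⟩ := hto y v hgv (hy.trans hfv.symm)
        exact Or.inr ⟨hgx, hgy, hrxu.trans (huv.trans (pvReach_symm land _ _ _ _ hryv))⟩
      · rw [if_neg hx, if_neg hy] at hxy
        exact hsound x y hxy
    · -- processed edges
      intro u' v' he hu'
      exact hpres _ _ (hproc u' v' he hu')
    · -- sizes
      intro r hrN hroot
      have hrhi : r ≠ hi := by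
        intro h
        rw [h, Function.update_self] at hroot
        omega
      have hroot_old : s.1 r = r := by
        rw [Function.update_of_ne hrhi] at hroot
        exact hroot
      by_cases hrlo : r = lo
      · subst hrlo
        rw [Function.update_self]
        have hfil : (Finset.range (n * m)).filter
              (fun k => pvFind (Function.update s.1 hi lo) k = lo) =
            ((Finset.range (n * m)).filter (fun k => pvFind s.1 k = lo)) ∪
            ((Finset.range (n * m)).filter (fun k => pvFind s.1 k = hi)) := by
          ext k
          simp only [Finset.mem_union, Finset.mem_filter, Finset.mem_range, C k]
          constructor
          · rintro ⟨hkN, hv⟩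
            by_cases hk : pvFind s.1 k = hi
            · exact Or.inr ⟨hkN, hk⟩
            · rw [if_neg hk] at hv
              exact Or.inl ⟨hkN, hv⟩
          · rintro (⟨hkN, hv⟩ | ⟨hkN, hv⟩)
            · refine ⟨hkN, ?_⟩
              rw [if_neg (by omega), hv]
            · refine ⟨hkN, ?_⟩
              rw [if_pos hv]
        rw [hfil, Finset.card_union_of_disjoint, hsz lo hloN hlo_root, hsz hi hhiN hhi_root]
        · push_cast
          ring
        · rw [Finset.disjoint_left]
          rintro k hk1 hk2
          simp only [Finset.mem_filter] at hk1 hk2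
          omega
      · rw [Function.update_of_ne hrlo]
        have hfe : (Finset.range (n * m)).filter
              (fun k => pvFind (Function.update s.1 hi lo) k = r) =
            (Finset.range (n * m)).filter (fun k => pvFind s.1 k = r) := by
          apply Finset.filter_congr
          intro k _
          rw [C k]
          by_cases hk : pvFind s.1 k = hi
          · rw [if_pos hk]
            constructor
            · intro h
              exact absurd h.symm hrlo
            · intro h
              exact absurd (h ▸ hk :  r = hi) hrhi
          · rw [if_neg hk]
        rw [hfe]
        exact hsz r hrN hroot_old
    · -- has-a-one flags
      intro r hrN hroot
      have hrhi : r ≠ hi := by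
        intro h
        rw [h, Function.update_self] at hroot
        omega
      have hroot_old : s.1 r = r := by
        rw [Function.update_of_ne hrhi] at hroot
        exact hroot
      by_cases hrlo : r = lo
      · subst hrlo
        rw [Function.update_self, Bool.or_eq_true, hone lo hloN hlo_root, hone hi hhiN hhi_root]
        constructor
        · rintro (⟨k, hkN, hkf, hk1⟩ | ⟨k, hkN, hkf, hk1⟩)
          · exact ⟨k, hkN, by rw [C k, if_neg (by omega), hkf], hk1⟩
          · exact ⟨k, hkN, by rw [C k, if_pos hkf], hk1⟩
        · rintro ⟨k, hkN, hkf, hk1⟩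
          rw [C k] at hkf
          by_cases hk : pvFind s.1 k = hi
          · exact Or.inr ⟨k, hkN, hk, hk1⟩
          · rw [if_neg hk] at hkf
            exact Or.inl ⟨k, hkN, hkf, hk1⟩
      · rw [Function.update_of_ne hrlo, hone r hrN hroot_old]
        constructor
        · rintro ⟨k, hkN, hkf, hk1⟩
          refine ⟨k, hkN, ?_, hk1⟩
          rw [C k, if_neg (by rw [hkf]; exact hrhi), hkf]
        · rintro ⟨k, hkN, hkf, hk1⟩
          rw [C k] at hkf
          by_cases hk : pvFind s.1 k = hi
          · rw [if_pos hk] at hkf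
            exact absurd hkf.symm hrlo
          · rw [if_neg hk] at hkf
            exact ⟨k, hkN, hkf, hk1⟩
    · -- the two classes are now joined
      rw [hval a hfa2, hval b hfb2]

lemma pvMerge_inv (land : List (List Int)) (n m t : Nat)
    (s : (Nat → Nat) × (Nat → Int) × (Nat → Bool)) (ht : t < n * m)
    (hinv : pvUFInv land n m t s) :
    pvUFInv land n m (t + 1) (pvMerge land m s t) := by
  have hm : 0 < m := by
    rcases Nat.eq_zero_or_pos m with h | h
    · subst h; omega
    · exact h
  simp only [pvMerge]
  by_cases h0 : pvAtIdx land m t ≠ 0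
  · rw [if_pos h0]
    have hgt : pvGoodI land n m t := ⟨ht, h0⟩
    by_cases h1 : m ≤ t ∧ pvAtIdx land m (t - m) ≠ 0
    · rw [if_pos h1]
      have he1 : pvEdge land n m t (t - m) := ⟨ht, h0, h1.2, Or.inl ⟨h1.1, rfl⟩⟩
      have hg1 : pvGoodI land n m (t - m) := ⟨by omega, h1.2⟩
      have hr1 : pvReach land (n : Int) (m : Int) (pvToPair m t) (pvToPair m (t - m)) :=
        Relation.ReflTransGen.single (pvEdge_adj land n m t (t - m) he1)
      obtain ⟨inv1, heq1, hpres1⟩ := pvUnion_inv land n m t s hinv t (t - m) hgt hg1 hr1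
      by_cases h2 : t % m ≠ 0 ∧ pvAtIdx land m (t - 1) ≠ 0
      · rw [if_pos h2]
        have he2 : pvEdge land n m t (t - 1) := ⟨ht, h0, h2.2, Or.inr ⟨h2.1, rfl⟩⟩
        have hg2 : pvGoodI land n m (t - 1) := ⟨by omega, h2.2⟩
        have hr2 : pvReach land (n : Int) (m : Int) (pvToPair m t) (pvToPair m (t - 1)) :=
          Relation.ReflTransGen.single (pvEdge_adj land n m t (t - 1) he2)
        obtain ⟨inv2, heq2, hpres2⟩ := pvUnion_inv land n m t _ inv1 t (t - 1) hgt hg2 hr2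
        obtain ⟨hp2, hsound2, hproc2, hsz2, hone2⟩ := inv2
        refine ⟨hp2, hsound2, ?_, hsz2, hone2⟩
        intro u v he hu
        rcases Nat.lt_succ_iff_lt_or_eq.mp hu with hlt | rfl
        · exact hproc2 u v he hlt
        · rcases he.2.2.2 with ⟨_, rfl⟩ | ⟨_, rfl⟩
          · exact hpres2 _ _ heq1
          · exact heq2
      · rw [if_neg h2]
        obtain ⟨hp1, hsound1, hproc1, hsz1, hone1⟩ := inv1
        refine ⟨hp1, hsound1, ?_, hsz1, hone1⟩
        intro u v he hu
        rcases Nat.lt_succ_iff_lt_or_eq.mp hu with hlt | rfl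
        · exact hproc1 u v he hlt
        · rcases he.2.2.2 with ⟨_, rfl⟩ | ⟨hmod, rfl⟩
          · exact heq1
          · exact absurd ⟨hmod, he.2.2.1⟩ h2
    · rw [if_neg h1]
      by_cases h2 : t % m ≠ 0 ∧ pvAtIdx land m (t - 1) ≠ 0
      · rw [if_pos h2]
        have he2 : pvEdge land n m t (t - 1) := ⟨ht, h0, h2.2, Or.inr ⟨h2.1, rfl⟩⟩
        have hg2 : pvGoodI land n m (t - 1) := ⟨by omega, h2.2⟩
        have hr2 : pvReach land (n : Int) (m : Int) (pvToPair m t) (pvToPair m (t - 1)) :=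
          Relation.ReflTransGen.single (pvEdge_adj land n m t (t - 1) he2)
        obtain ⟨inv2, heq2, hpres2⟩ := pvUnion_inv land n m t s hinv t (t - 1) hgt hg2 hr2
        obtain ⟨hp2, hsound2, hproc2, hsz2, hone2⟩ := inv2
        refine ⟨hp2, hsound2, ?_, hsz2, hone2⟩
        intro u v he hu
        rcases Nat.lt_succ_iff_lt_or_eq.mp hu with hlt | rfl
        · exact hproc2 u v he hlt
        · rcases he.2.2.2 with ⟨hgem, rfl⟩ | ⟨_, rfl⟩
          · exact absurd ⟨hgem, he.2.2.1⟩ h1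
          · exact heq2
      · rw [if_neg h2]
        obtain ⟨hp0, hsound0, hproc0, hsz0, hone0⟩ := hinv
        refine ⟨hp0, hsound0, ?_, hsz0, hone0⟩
        intro u v he hu
        rcases Nat.lt_succ_iff_lt_or_eq.mp hu with hlt | rfl
        · exact hproc0 u v he hlt
        · rcases he.2.2.2 with ⟨hgem, rfl⟩ | ⟨hmod, rfl⟩
          · exact absurd ⟨hgem, he.2.2.1⟩ h1
          · exact absurd ⟨hmod, he.2.2.1⟩ h2
  · rw [if_neg h0]
    obtain ⟨hp0, hsound0, hproc0, hsz0, hone0⟩ := hinv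
    refine ⟨hp0, hsound0, ?_, hsz0, hone0⟩
    intro u v he hu
    rcases Nat.lt_succ_iff_lt_or_eq.mp hu with hlt | rfl
    · exact hproc0 u v he hlt
    · exact absurd he.2.1 h0

lemma pvUF_run (land : List (List Int)) (n m : Nat) :
    ∀ t, t ≤ n * m → pvUFInv land n m t ((List.range t).foldl (pvMerge land m)
      ((fun x => x), (fun _ => 1), (fun k => pvAtIdx land m k == 1))) := by
  intro t
  induction t with
  | zero => intro _; exact pvUFInv_init land n m
  | succ t ih =>
    intro ht
    rw [List.range_succ, List.foldl_append]
    exact pvMerge_inv land n m t _ (by omega) (ih (by omega))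

-- find-equality after the full union loop = connectivity (on land cells)
lemma pvFind_iff_reach (land : List (List Int)) (n m : Nat)
    (s : (Nat → Nat) × (Nat → Int) × (Nat → Bool))
    (hinv : pvUFInv land n m (n * m) s) (a b : Nat)
    (ha : pvGoodI land n m a) (hb : pvGoodI land n m b) :
    pvFind s.1 a = pvFind s.1 b ↔
      pvReach land (n : Int) (m : Int) (pvToPair m a) (pvToPair m b) := by
  obtain ⟨hp, hsound, hproc, hsz, hone⟩ := hinv
  have hm : 0 < m := by
    have := ha.1
    rcases Nat.eq_zero_or_pos m with h | h
    · subst h; omega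
    · exact h
  constructor
  · intro h
    rcases hsound a b h with rfl | ⟨_, _, hr⟩
    · exact Relation.ReflTransGen.refl
    · exact hr
  · intro hr
    have key : ∀ q, pvReach land (n : Int) (m : Int) (pvToPair m a) q →
        pvGood land (n : Int) (m : Int) q → pvFind s.1 a = pvFind s.1 (pvFromPair m q) := by
      intro q hq
      induction hq with
      | refl =>
        intro _
        rw [pvFromPair_toPair m a hm]
      | tail hxy hadj ih =>
        intro _
        have h1 := ih hadj.1
        rcases pvAdj_edge land n m _ _ hadj with he | he
        · rw [h1, hproc _ _ he he.1]
        · rw [h1, ← hproc _ _ he he.1]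
    have h := key (pvToPair m b) hr ((pvGood_toPair land n m b hb.1).mpr hb.2)
    rw [pvFromPair_toPair m b hm] at h
    exact h

lemma pvClassCard (land : List (List Int)) (n m : Nat)
    (s : (Nat → Nat) × (Nat → Int) × (Nat → Bool))
    (hinv : pvUFInv land n m (n * m) s) (w : Nat) (hw : pvGoodI land n m w)
    (S : Finset (Int × Int))
    (hS : ∀ u, u ∈ S ↔ pvReach land (n : Int) (m : Int) (pvToPair m w) u) :
    ((Finset.range (n * m)).filter (fun k => pvFind s.1 k = pvFind s.1 w)).card = S.card := by
  have hm : 0 < m := by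
    have := hw.1
    rcases Nat.eq_zero_or_pos m with h | h
    · subst h; omega
    · exact h
  have hgw : pvGood land (n : Int) (m : Int) (pvToPair m w) :=
    (pvGood_toPair land n m w hw.1).mpr hw.2
  have hmemS : ∀ u ∈ S, pvGood land (n : Int) (m : Int) u :=
    fun u hu => pvReach_good land _ _ _ u hgw ((hS u).mp hu)
  apply Finset.card_bij' (fun k _ => pvToPair m k) (fun u _ => pvFromPair m u)
  · intro k hk
    simp only [Finset.mem_filter, Finset.mem_range] at hk
    rw [hS]
    obtain ⟨hkN, hkf⟩ := hk
    rcases (hinv.2.1) k w hkf with rfl | ⟨hgk, _, hrkw⟩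
    · exact Relation.ReflTransGen.refl
    · exact pvReach_symm land _ _ _ _ hrkw
  · intro u hu
    have hgu := hmemS u hu
    have hgiu := pvGood_fromPair land n m u hgu
    simp only [Finset.mem_filter, Finset.mem_range]
    refine ⟨hgiu.1, ?_⟩
    rw [pvFind_iff_reach land n m s hinv (pvFromPair m u) w hgiu hw,
      pvToPair_fromPair n m u ⟨hgu.1, hgu.2.1, hgu.2.2.1, hgu.2.2.2.1⟩]
    exact pvReach_symm land _ _ _ _ ((hS u).mp hu)
  · intro k hk
    simp only [Finset.mem_filter, Finset.mem_range] at hk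
    exact pvFromPair_toPair m k hm
  · intro u hu
    have hgu := hmemS u hu
    exact pvToPair_fromPair n m u ⟨hgu.1, hgu.2.1, hgu.2.2.1, hgu.2.2.2.1⟩

-- ===== B's per-column fold, characterised as a Finset sum =====
lemma pvSeenFold (f : Nat → Option Nat) (w : Nat → Int) :
    ∀ (js P : List Nat) (st : Int × PySem.Set Nat),
      (∀ r, PySem.Set.contains st.2 r = true ↔ r ∈ P.filterMap f) →
      st.1 = ∑ r ∈ (P.filterMap f).toFinset, w r →
      (js.foldl (fun st j => match f j with
          | some r => if PySem.Set.contains st.2 r = false then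
              (st.1 + w r, PySem.Set.add st.2 r) else st
          | none => st) st).1 = ∑ r ∈ ((P ++ js).filterMap f).toFinset, w r := by
  have hcx : ∀ (t : PySem.Set Nat) (x : Nat),
      PySem.Set.contains t x = true ↔ x ∈ (t : List Nat) := by
    intro t x
    simp [PySem.Set.contains]
  intro js
  induction js with
  | nil =>
    intro P st _ h2
    simpa using h2
  | cons j js ih =>
    intro P st h1 h2
    simp only [List.foldl_cons]
    have hsplit : P ++ j :: js = (P ++ [j]) ++ js := by simp
    rw [hsplit]
    rcases hfj : f j with _ | r
    · simp only [hfj]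
      apply ih (P ++ [j])
      · intro r
        rw [h1 r]
        simp [List.filterMap_append, hfj]
      · rw [h2]
        have hfm : (P ++ [j]).filterMap f = P.filterMap f := by
          simp [List.filterMap_append, hfj]
        rw [hfm]
    · simp only [hfj]
      have hfm : (P ++ [j]).filterMap f = P.filterMap f ++ [r] := by
        simp [List.filterMap_append, hfj]
      by_cases hc : PySem.Set.contains st.2 r = false
      · rw [if_pos hc]
        have hnotin : r ∉ P.filterMap f := by
          intro h
          rw [← h1 r, hc] at h
          cases h
        have hadd : (PySem.Set.add st.2 r : List Nat) = (st.2 : List Nat) ++ [r] := by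
          simp only [PySem.Set.add]
          rw [if_neg (fun hmem => by
            rw [hc] at hmem
            exact Bool.false_ne_true hmem)]
        apply ih (P ++ [j])
        · intro x
          rw [hcx _ x, hadd, hfm, List.mem_append, List.mem_append]
          rw [show (x ∈ (st.2 : List Nat)) = (x ∈ P.filterMap f) from
            propext ((hcx st.2 x).symm.trans (h1 x))]
        · rw [hfm, List.toFinset_append]
          have hsg : ([r] : List Nat).toFinset = {r} := by simp
          rw [hsg, Finset.union_comm, ← Finset.insert_eq,
            Finset.sum_insert (by simpa using hnotin), h2]
          ring
      · rw [if_neg hc]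
        have hctrue : PySem.Set.contains st.2 r = true := by
          revert hc
          cases PySem.Set.contains st.2 r <;> simp
        have hin : r ∈ P.filterMap f := (h1 r).mp hctrue
        apply ih (P ++ [j])
        · intro x
          rw [h1 x, hfm, List.mem_append, List.mem_singleton]
          constructor
          · exact fun h => Or.inl h
          · rintro (h | rfl)
            · exact h
            · exact hin
        · rw [hfm, List.toFinset_append]
          have hsg : ([r] : List Nat).toFinset = {r} := by simp
          rw [hsg, Finset.union_eq_left.mpr
            (Finset.singleton_subset_iff.mpr (List.mem_toFinset.mpr hin)), h2]

lemma pvColB_sum (land : List (List Int)) (n m : Nat)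
    (s : (Nat → Nat) × (Nat → Int) × (Nat → Bool)) (i : Nat) :
    pvColB land n m s i =
      ∑ r ∈ ((List.range n).filterMap (fun j =>
          if (land.getD j []).getD i 0 ≠ 0 ∧ s.2.2 (pvFind s.1 (j * m + i)) = true then
            some (pvFind s.1 (j * m + i)) else none)).toFinset, s.2.1 r := by
  unfold pvColB
  have hbody : (fun (st : Int × PySem.Set Nat) j =>
      if (land.getD j []).getD i 0 ≠ 0 then
        let r := pvFind s.1 (j * m + i)
        if s.2.2 r = true ∧ PySem.Set.contains st.2 r = false then
          (st.1 + s.2.1 r, PySem.Set.add st.2 r)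
        else st
      else st) = (fun (st : Int × PySem.Set Nat) j =>
      match (if (land.getD j []).getD i 0 ≠ 0 ∧ s.2.2 (pvFind s.1 (j * m + i)) = true then
          some (pvFind s.1 (j * m + i)) else none) with
        | some r => if PySem.Set.contains st.2 r = false then
            (st.1 + s.2.1 r, PySem.Set.add st.2 r) else st
        | none => st) := by
    funext st j
    by_cases hl : (land.getD j []).getD i 0 ≠ 0
    · rw [if_pos hl]
      by_cases hh : s.2.2 (pvFind s.1 (j * m + i)) = true
      · by_cases hcont : PySem.Set.contains st.2 (pvFind s.1 (j * m + i)) = false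
        · rw [if_pos ⟨hh, hcont⟩, if_pos ⟨hl, hh⟩]
          dsimp only
          rw [if_pos hcont]
        · rw [if_neg (fun hand => hcont hand.2), if_pos ⟨hl, hh⟩]
          dsimp only
          rw [if_neg hcont]
      · rw [if_neg (fun hand => hh hand.1), if_neg (fun hand => hh hand.2)]
    · rw [if_neg hl, if_neg (fun hand => hl hand.1)]
  rw [hbody]
  have h := pvSeenFold (fun j =>
      if (land.getD j []).getD i 0 ≠ 0 ∧ s.2.2 (pvFind s.1 (j * m + i)) = true then
        some (pvFind s.1 (j * m + i)) else none) s.2.1 (List.range n) []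
    (0, PySem.Set.empty) (by intro r; simp [PySem.Set.contains, PySem.Set.empty]) (by simp)
  simpa using h

lemma pvAt_cast (land : List (List Int)) (a b : Nat) :
    pvLandAt land (a : Int) (b : Int) = (land.getD a []).getD b 0 := by
  simp only [pvLandAt, PySem.List.pyGetD_natCast]

lemma pvIdx_mul_add_div (m j i : Nat) (hm : 0 < m) (hi : i < m) :
    (j * m + i) / m = j ∧ (j * m + i) % m = i := by
  constructor
  · rw [Nat.add_comm, Nat.add_mul_div_right _ _ hm, Nat.div_eq_of_lt hi, Nat.zero_add]
  · rw [Nat.add_comm, Nat.add_mul_mod_self_right, Nat.mod_eq_of_lt hi]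

lemma pvToPair_mul_add (m j i : Nat) (hi : i < m) :
    pvToPair m (j * m + i) = ((j : Int), (i : Int)) := by
  obtain ⟨h1, h2⟩ := pvIdx_mul_add_div m j i (by omega) hi
  unfold pvToPair
  rw [h1, h2]

lemma pvAtIdx_fromPair (land : List (List Int)) (n m : Nat) (p : Int × Int)
    (hp : 0 ≤ p.1 ∧ p.1 < (n : Int) ∧ 0 ≤ p.2 ∧ p.2 < (m : Int)) :
    pvAtIdx land m (pvFromPair m p) = pvLandAt land p.1 p.2 := by
  have ht := pvToPair_fromPair n m p hp
  have h := pvAt_toPair land m (pvFromPair m p)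
  rw [show ((pvFromPair m p / m : Nat) : Int) = p.1 from by rw [← congrArg Prod.fst ht]; rfl,
      show ((pvFromPair m p % m : Nat) : Int) = p.2 from by rw [← congrArg Prod.snd ht]; rfl] at h
  exact h.symm

-- ===== the two column sums agree =====
lemma pvCol_eq (land : List (List Int)) (n m : Nat)
    (s : (Nat → Nat) × (Nat → Int) × (Nat → Bool))
    (hinv : pvUFInv land n m (n * m) s)
    (hscan : pvScanInvA land (n : Int) (m : Int) (pvGridList (n : Int) (m : Int))
      (pvScanA land (n : Int) (m : Int)))
    (i : Nat) (hi : i < m) :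
    pvColA (n : Int) (pvScanA land (n : Int) (m : Int)).1
      (pvScanA land (n : Int) (m : Int)).2 ((i : Nat) : Int) = pvColB land n m s i := by
  obtain ⟨⟨hcl, hgood, hbound, hnn⟩, reps, hlen, hreps, hlab, hcard, hcomp⟩ := hscan
  have hp1 : ∀ x, s.1 x ≤ x := hinv.1
  rw [pvColA_eq (n : Int) ((i : Nat) : Int) _ _ hbound, pvColB_sum land n m s i,
    show (pvScanA land (n : Int) (m : Int)).2.length = reps.length from hlen]
  have hrep_good : ∀ l, l < reps.length →
      pvGood land (n : Int) (m : Int) (reps.getD l (0, 0)) := fun l hl => (hreps l hl).1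
  have hrep_bounds : ∀ l (hl : l < reps.length),
      0 ≤ (reps.getD l (0, 0)).1 ∧ (reps.getD l (0, 0)).1 < (n : Int) ∧
      0 ≤ (reps.getD l (0, 0)).2 ∧ (reps.getD l (0, 0)).2 < (m : Int) := by
    intro l hl
    obtain ⟨h1, h2, h3, h4, _⟩ := hrep_good l hl
    exact ⟨h1, h2, h3, h4⟩
  have hrepI : ∀ l, l < reps.length →
      pvGoodI land n m (pvFromPair m (reps.getD l (0, 0))) :=
    fun l hl => pvGood_fromPair land n m _ (hrep_good l hl)
  have hrepT : ∀ l (hl : l < reps.length),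
      pvToPair m (pvFromPair m (reps.getD l (0, 0))) = reps.getD l (0, 0) :=
    fun l hl => pvToPair_fromPair n m _ (hrep_bounds l hl)
  have hcell_eq : ∀ j : Nat, j < n → pvFromPair m ((j : Int), ((i : Nat) : Int)) = j * m + i := by
    intro j _
    simp [pvFromPair]
  have hcell_pair : ∀ j : Nat, pvToPair m (j * m + i) = ((j : Int), ((i : Nat) : Int)) :=
    fun j => pvToPair_mul_add m j i hi
  apply Finset.sum_bij (fun l _ => pvFind s.1 (pvFromPair m (reps.getD l (0, 0))))
  · -- maps into the root set
    intro l hl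
    simp only [Finset.mem_filter, Finset.mem_range] at hl
    obtain ⟨hlL, j, hjmem, hjval⟩ := hl
    obtain ⟨hj0, hjn⟩ := PySem.List.mem_pyRange_one.mp hjmem
    have hreach : pvReach land (n : Int) (m : Int) (reps.getD l (0, 0)) (j, ((i : Nat) : Int)) :=
      (hlab l hlL (j, ((i : Nat) : Int))).mp hjval
    have hgcell : pvGood land (n : Int) (m : Int) (j, ((i : Nat) : Int)) :=
      pvReach_good land _ _ _ _ (hrep_good l hlL) hreach
    have hju : ((j.toNat : Nat) : Int) = j := Int.toNat_of_nonneg hj0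
    have hjn' : j.toNat < n := by omega
    have hu_eq : pvFromPair m ((j.toNat : Int), ((i : Nat) : Int)) = j.toNat * m + i :=
      hcell_eq j.toNat hjn'
    have hgcell' : pvGood land (n : Int) (m : Int) ((j.toNat : Int), ((i : Nat) : Int)) := by
      rw [hju]
      exact hgcell
    have huI : pvGoodI land n m (j.toNat * m + i) := by
      rw [← hu_eq]
      exact pvGood_fromPair land n m _ hgcell'
    have hfind_eq : pvFind s.1 (j.toNat * m + i) =
        pvFind s.1 (pvFromPair m (reps.getD l (0, 0))) := by
      rw [pvFind_iff_reach land n m s hinv _ _ huI (hrepI l hlL), hcell_pair, hrepT l hlL, hju]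
      exact pvReach_symm land _ _ _ _ hreach
    rw [List.mem_toFinset, List.mem_filterMap]
    refine ⟨j.toNat, List.mem_range.mpr hjn', ?_⟩
    have hland : (land.getD j.toNat []).getD i 0 ≠ 0 := by
      rw [← pvAt_cast land j.toNat i, hju]
      exact hgcell.2.2.2.2
    have hrootN : pvFind s.1 (j.toNat * m + i) < n * m :=
      lt_of_le_of_lt (pvFind_le s.1 hp1 _) huI.1
    have hone1 : s.2.2 (pvFind s.1 (j.toNat * m + i)) = true := by
      rw [hinv.2.2.2.2 _ hrootN (pvFind_root s.1 hp1 _)]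
      refine ⟨pvFromPair m (reps.getD l (0, 0)), (hrepI l hlL).1, hfind_eq.symm, ?_⟩
      rw [pvAtIdx_fromPair land n m _ (hrep_bounds l hlL)]
      exact (hreps l hlL).2
    rw [if_pos ⟨hland, hone1⟩, hfind_eq]
  · -- injective
    intro l1 hl1 l2 hl2 heq
    simp only [Finset.mem_filter, Finset.mem_range] at hl1 hl2
    have hr12 := (pvFind_iff_reach land n m s hinv _ _ (hrepI l1 hl1.1) (hrepI l2 hl2.1)).mp heq
    rw [hrepT l1 hl1.1, hrepT l2 hl2.1] at hr12
    have hv2 := (hlab l1 hl1.1 _).mpr hr12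
    have hv2' := (hlab l2 hl2.1 _).mpr Relation.ReflTransGen.refl
    rw [hv2'] at hv2
    omega
  · -- surjective
    intro r hr
    rw [List.mem_toFinset, List.mem_filterMap] at hr
    obtain ⟨j', hj'mem, hj'val⟩ := hr
    have hj'n : j' < n := List.mem_range.mp hj'mem
    by_cases hcond : (land.getD j' []).getD i 0 ≠ 0 ∧ s.2.2 (pvFind s.1 (j' * m + i)) = true
    swap
    · rw [if_neg hcond] at hj'val
      cases hj'val
    rw [if_pos hcond] at hj'val
    have hr_eq : pvFind s.1 (j' * m + i) = r := Option.some.inj hj'val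
    have hgcell' : pvGood land (n : Int) (m : Int) ((j' : Int), ((i : Nat) : Int)) := by
      refine ⟨by positivity, by dsimp only; exact_mod_cast hj'n, by positivity,
        by dsimp only; exact_mod_cast hi, ?_⟩
      rw [pvAt_cast land j' i]
      exact hcond.1
    have hu'I : pvGoodI land n m (j' * m + i) := by
      rw [← hcell_eq j' hj'n]
      exact pvGood_fromPair land n m _ hgcell'
    have hrootN : pvFind s.1 (j' * m + i) < n * m :=
      lt_of_le_of_lt (pvFind_le s.1 hp1 _) hu'I.1
    obtain ⟨k, hkN, hkf, hk1⟩ :=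
      (hinv.2.2.2.2 _ hrootN (pvFind_root s.1 hp1 _)).mp hcond.2
    have hkI : pvGoodI land n m k := ⟨hkN, by rw [hk1]; exact one_ne_zero⟩
    have hkg : pvGood land (n : Int) (m : Int) (pvToPair m k) :=
      (pvGood_toPair land n m k hkN).mpr hkI.2
    have hk_land1 : pvLandAt land (pvToPair m k).1 (pvToPair m k).2 = 1 := by
      show pvLandAt land ((k / m : Nat) : Int) ((k % m : Nat) : Int) = 1
      rw [pvAt_toPair]
      exact hk1
    have hkchk : (pvScanA land (n : Int) (m : Int)).1 (pvToPair m k) ≠ 0 := by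
      apply hcomp
      · rw [pv_mem_gridList]
        exact ⟨hkg.1, hkg.2.1, hkg.2.2.1, hkg.2.2.2.1⟩
      · exact hk_land1
    have hkb := hbound (pvToPair m k)
    rw [hlen] at hkb
    set c := (pvScanA land (n : Int) (m : Int)).1 (pvToPair m k) with hcdef
    have hl_lt : (c - 1).toNat < reps.length := by omega
    have hc_val : c = (((c - 1).toNat : Nat) : Int) + 1 := by omega
    have hreach_k : pvReach land (n : Int) (m : Int)
        (reps.getD (c - 1).toNat (0, 0)) (pvToPair m k) :=
      (hlab (c - 1).toNat hl_lt _).mp (by rw [← hc_val])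
    have hfk_eq : pvFind s.1 k = pvFind s.1 (j' * m + i) := by
      rw [hkf, hr_eq]
    have hreach_ku : pvReach land (n : Int) (m : Int) (pvToPair m k) (pvToPair m (j' * m + i)) :=
      (pvFind_iff_reach land n m s hinv _ _ hkI hu'I).mp hfk_eq
    refine ⟨(c - 1).toNat, ?_, ?_⟩
    · simp only [Finset.mem_filter, Finset.mem_range]
      refine ⟨hl_lt, (j' : Int), ?_, ?_⟩
      · exact PySem.List.mem_pyRange_one.mpr ⟨by positivity, by exact_mod_cast hj'n⟩
      · rw [show ((j' : Int), ((i : Nat) : Int)) = pvToPair m (j' * m + i) from (hcell_pair j').symm]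
        exact (hlab (c - 1).toNat hl_lt _).mpr (hreach_k.trans hreach_ku)
    · have : pvReach land (n : Int) (m : Int)
          (pvToPair m (pvFromPair m (reps.getD (c - 1).toNat (0, 0)))) (pvToPair m k) := by
        rw [hrepT _ hl_lt]
        exact hreach_k
      rw [(pvFind_iff_reach land n m s hinv _ _ (hrepI _ hl_lt) hkI).mpr this, hkf, hr_eq]
  · -- equal summands
    intro l hl
    simp only [Finset.mem_filter, Finset.mem_range] at hl
    obtain ⟨S, hSm, hSc⟩ := hcard l hl.1
    have hrootN : pvFind s.1 (pvFromPair m (reps.getD l (0, 0))) < n * m :=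
      lt_of_le_of_lt (pvFind_le s.1 hp1 _) (hrepI l hl.1).1
    rw [hSc, hinv.2.2.2.1 _ hrootN (pvFind_root s.1 hp1 _),
      pvClassCard land n m s hinv _ (hrepI l hl.1) S
        (by rw [hrepT l hl.1]; exact hSm)]

theorem pv_main (land : List (List Int)) : solution land = solution_alt land := by
  have hscan := pvScanA_char land (land.length : Int)
    ((PySem.List.pyGetD land 0 []).length : Int)
  have hinv := pvUF_run land land.length (PySem.List.pyGetD land 0 []).length
    (land.length * (PySem.List.pyGetD land 0 []).length) (le_refl _)
  simp only [solution, solution_alt]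
  rw [PySem.List.pyRange_zero_nat, List.foldl_map]
  apply PySem.List.foldl_congr_mem
  intro acc x hx
  rw [pvCol_eq land land.length (PySem.List.pyGetD land 0 []).length _ hinv hscan x
    (List.mem_range.mp hx)]

-- ===== VERDICT (by name: the statement is the Claim_ definition above) =====
theorem solution_spec : Claim_equal_solution := by
  intro land _ _
  exact pv_main land
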